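-- pv_equiv track=rewrite | github.com/netpersona/SignageCommander | attached_assets/test_1756235972699.py | assign_layers
-- ===== SOURCE A (Python) =====
-- from collections import defaultdict, deque
--
-- def classify_node(name):
--     ln = name.lower()
--     # switches: sw- prefix (or sw<digit> variants)
--     if ln.startswith("sw-") or (ln.startswith("sw") and len(ln) > 2 and ln[2].isdigit()):
--         return "switch"
--     if "wss" in ln or ln.startswith("but-wss") or ln.startswith("wss"):
--         return "workstation"
--     if ln.startswith("but-tool") or ln.startswith("ser-") or "tool" in ln:
--         return "server"
--     return "other"
--
-- def assign_layers(nodes, edges):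
--     adj = {n: set() for n in nodes}
--     for e in edges:
--         adj[e["a"]].add(e["b"])
--         adj[e["b"]].add(e["a"])
--
--     types = {n: classify_node(n) for n in nodes}
--     seeds = [n for n, t in types.items() if t == "server"]
--     if not seeds:
--         seeds = [n for n, t in types.items() if t == "switch"]
--     if not seeds and nodes:
--         seeds = [next(iter(nodes))]
--
--     dist = {n: float("inf") for n in nodes}
--     q = deque()
--     for s in seeds:
--         dist[s] = 0
--         q.append(s)
--
--     while q:
--         u = q.popleft()
--         for v in adj.get(u, []):
--             if dist[v] > dist[u] + 1:
--                 dist[v] = dist[u] + 1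
--                 q.append(v)
--
--     finite = [d for d in dist.values() if d != float("inf")]
--     min_d = min(finite) if finite else 0
--     for n in nodes:
--         if dist[n] == float("inf"):
--             dist[n] = 0
--         else:
--             dist[n] = int(dist[n] - min_d)
--
--     max_d = max(dist.values()) if dist else 0
--     for n, t in types.items():
--         if t == "workstation":
--             dist[n] = max(dist[n], max_d)
--
--     layers = sorted(set(dist.values()))
--     mapping = {old: i for i, old in enumerate(layers)}
--     for n in list(dist.keys()):
--         dist[n] = mapping[dist[n]]
--     return dist
-- ===== SOURCE B (Python) =====
-- def classify_node(name):
--     ln = name.lower()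
--     if ln.startswith("sw-") or (ln.startswith("sw") and len(ln) > 2 and ln[2].isdigit()):
--         return "switch"
--     if "wss" in ln or ln.startswith("but-wss") or ln.startswith("wss"):
--         return "workstation"
--     if ln.startswith("but-tool") or ln.startswith("ser-") or "tool" in ln:
--         return "server"
--     return "other"
--
-- def assign_layers(nodes, edges):
--     # Bellman-Ford style synchronous relaxation: no queue, no frontier, no visit
--     # order at all -- each round recomputes every node's value from its
--     # neighbours; len(order) rounds reach the unit-weight shortest-distance
--     # fixpoint because no shortest path has more than len(order)-1 edges.
--     order = list(dict.fromkeys(nodes))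
--     types = {n: classify_node(n) for n in order}
--     adj = {n: set() for n in order}
--     for e in edges:
--         adj[e["a"]].add(e["b"])
--         adj[e["b"]].add(e["a"])
--
--     seeds = ([n for n in order if types[n] == "server"]
--              or [n for n in order if types[n] == "switch"]
--              or order[:1])
--
--     dist = {s: 0 for s in seeds}
--     for _ in range(len(order)):
--         new = {}
--         for n in order:
--             cands = ([dist[n]] if n in dist else []) \
--                 + [dist[m] + 1 for m in adj[n] if m in dist]
--             if cands:
--                 new[n] = min(cands)
--         dist = new
--
--     finite = [dist[n] for n in order if n in dist]
--     base = min(finite) if finite else 0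
--     raw = {n: (dist[n] - base if n in dist else 0) for n in order}
--     top = max(raw.values()) if raw else 0
--     lvl = {n: (max(raw[n], top) if types[n] == "workstation" else raw[n]) for n in order}
--     layers = sorted(set(lvl.values()))
--     rank = {v: i for i, v in enumerate(layers)}
--     return {n: rank[lvl[n]] for n in order}
-- ===== Notes on version B (the rewrite author's own statement) =====
-- stated objective: alternative
-- what changed: Replaces the deque-based relaxation BFS with a queue-free Bellman-Ford style fixpoint: len(nodes) synchronous rounds in which every node's distance is recomputed as the min over itself and its neighbours plus one, with the post-processing rebuilt as per-node comprehensions.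
import Mathlib
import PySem

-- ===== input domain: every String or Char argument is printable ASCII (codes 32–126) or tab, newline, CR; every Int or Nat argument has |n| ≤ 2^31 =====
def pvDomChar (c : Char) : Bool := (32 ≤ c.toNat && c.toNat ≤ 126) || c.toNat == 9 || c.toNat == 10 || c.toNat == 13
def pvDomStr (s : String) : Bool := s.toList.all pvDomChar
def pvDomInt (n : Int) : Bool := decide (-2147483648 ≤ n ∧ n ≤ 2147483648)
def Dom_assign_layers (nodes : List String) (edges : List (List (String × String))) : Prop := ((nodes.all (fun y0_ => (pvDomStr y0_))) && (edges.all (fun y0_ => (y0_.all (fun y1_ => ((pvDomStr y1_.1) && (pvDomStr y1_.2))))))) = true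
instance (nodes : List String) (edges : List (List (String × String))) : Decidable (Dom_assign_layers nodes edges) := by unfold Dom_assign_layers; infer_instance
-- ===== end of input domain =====

-- B replaces the deque-relaxation BFS by a queue-free Bellman-Ford style fixpoint
-- (len(nodes) synchronous rounds, each recomputing every node's value as the min over
-- itself and its neighbours plus one) and rebuilds the post-processing as per-node
-- comprehensions; an alternative of similar size, not claimed faster.

-- ===== PORT A =====

-- shared module helper classify_node (identical in Source A and Source B)
def classifyNode (name : String) : String :=
  let ln := PySem.Str.lower name
  if PySem.Str.startswith ln "sw-" ||
     (PySem.Str.startswith ln "sw" && decide (2 < PySem.Str.len ln) &&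
       (match PySem.Str.pyGet? ln 2 with | some c => PySem.Chars.isdigit c | none => false)) then
    "switch"
  else if PySem.Str.isIn "wss" ln || PySem.Str.startswith ln "but-wss" || PySem.Str.startswith ln "wss" then
    "workstation"
  else if PySem.Str.startswith ln "but-tool" || PySem.Str.startswith ln "ser-" || PySem.Str.isIn "tool" ln then
    "server"
  else
    "other"

-- one edge of the edge loop: adj[e["a"]].add(e["b"]); adj[e["b"]].add(e["a"])
-- (identical line in Source A and Source B; the fall-through arm is Python's KeyError, excluded by Pre_)
def edgeAdd (adj : PySem.Dict String (PySem.Set String)) (e : List (String × String)) :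
    PySem.Dict String (PySem.Set String) :=
  match (PySem.Dict.ofList e).get? "a", (PySem.Dict.ofList e).get? "b" with
  | some a, some b =>
      (adj.modify a PySem.Set.empty (fun s => PySem.Set.add s b)).modify b PySem.Set.empty
        (fun s => PySem.Set.add s a)
  | _, _ => adj

def buildTypes (l : List String) : PySem.Dict String String :=
  l.foldl (fun d n => d.insert n (classifyNode n)) PySem.Dict.empty

def buildAdj (l : List String) (edges : List (List (String × String))) :
    PySem.Dict String (PySem.Set String) :=
  edges.foldl edgeAdd (l.foldl (fun d n => d.insert n PySem.Set.empty) PySem.Dict.empty)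

-- mapping = {old: i for i, old in enumerate(layers)}  (identical comprehension in Source A and Source B)
def mkRank (layers : List Int) : PySem.Dict Int Int :=
  (PySem.List.enumerate layers).foldl (fun m p => m.insert p.2 p.1) PySem.Dict.empty

-- min(xs) if xs else 0  /  max(xs) if xs else 0   (identical idiom in Source A and Source B)
def pyMinD (xs : List Int) : Int :=
  match PySem.List.min? xs (fun x => x) with | some m => m | none => 0

def pyMaxD (xs : List Int) : Int :=
  match PySem.List.max? xs (fun x => x) with | some m => m | none => 0

-- float('inf') is modelled as `none`; all finite dist values are ints (0 and d+1), so exact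
def pyAddOneInf : Option Int → Option Int
  | none => none
  | some d => some (d + 1)

def pyGtInf : Option Int → Option Int → Bool    -- x > y with none = float('inf')
  | none, none => false
  | none, some _ => true
  | some _, none => false
  | some x, some y => decide (y < x)

-- body of A's neighbour loop: if dist[v] > dist[u] + 1: dist[v] = dist[u] + 1; q.append(v)
-- (dist[u]/dist[v] are KeyError-free under Pre_, read with default none)
def nbrA (u : String) (p : PySem.Dict String (Option Int) × List String) (v : String) :
    PySem.Dict String (Option Int) × List String :=
  if pyGtInf (p.1.getD v none) (pyAddOneInf (p.1.getD u none)) then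
    (p.1.insert v (pyAddOneInf (p.1.getD u none)), p.2 ++ [v])
  else p

-- A's while-q deque loop; the fuel is only a totality guard (under Pre_ the loop provably
-- finishes within it: each pop consumes one unit and there are at most 3*len(nodes) pops)
def bfsA (adj : PySem.Dict String (PySem.Set String)) :
    Nat → PySem.Dict String (Option Int) → List String → PySem.Dict String (Option Int)
  | 0, dist, _ => dist
  | _ + 1, dist, [] => dist
  | fuel + 1, dist, u :: q =>
      let st := (adj.getD u PySem.Set.empty).foldl (nbrA u) (dist, q)
      bfsA adj fuel st.1 st.2

-- the three seeds stages of Source A (server comprehension, switch fallback, first-node fallback)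
def seedsOfA (types : PySem.Dict String String) (nodes : List String) : List String :=
  let s1 := (types.items.filter (fun p => p.2 == "server")).map (fun p => p.1)
  let s2 := if s1.isEmpty then (types.items.filter (fun p => p.2 == "switch")).map (fun p => p.1) else s1
  if s2.isEmpty && !nodes.isEmpty then [nodes.headD ""] else s2

-- one step of Source A's int-retyping pass: a key is in d2 exactly when the loop already
-- visited it, so `dist[n] == inf` is the none-branch of d2.get? first, then of the BFS dict
def passBodyA (dist : PySem.Dict String (Option Int)) (min_d : Int)
    (d2 : PySem.Dict String Int) (n : String) : PySem.Dict String Int :=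
  match d2.get? n with
  | some x => d2.insert n (x - min_d)
  | none => match dist.getD n none with
            | none => d2.insert n 0
            | some k => d2.insert n (k - min_d)

-- everything after the BFS loop of Source A, on the BFS result `dist`
def postA (nodes : List String) (types : PySem.Dict String String)
    (dist : PySem.Dict String (Option Int)) : List (String × Int) :=
  let finite := dist.values.filterMap (fun o => o)   -- [d for d in dist.values() if d != inf]
  let min_d : Int := pyMinD finite
  let dist2 := nodes.foldl (passBodyA dist min_d) PySem.Dict.empty
  let max_d : Int := pyMaxD dist2.values
  let dist3 := types.items.foldl (fun (d2 : PySem.Dict String Int) p =>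
      if p.2 == "workstation" then d2.insert p.1 (max (d2.getD p.1 0) max_d) else d2) dist2
  let layers := PySem.List.sorted (PySem.Set.ofList dist3.values) (fun x => x) false
  let mapping := mkRank layers
  let dist4 := dist3.keys.foldl (fun (d : PySem.Dict String Int) n =>
      d.insert n (mapping.getD (d.getD n 0) 0)) dist3   -- mapping[dist[n]] is always present
  dist4.items

def assign_layers (nodes : List String) (edges : List (List (String × String))) :
    List (String × Int) :=
  let adj := buildAdj nodes edges
  let types := buildTypes nodes
  let seeds := seedsOfA types nodes
  let dist0 := nodes.foldl (fun d n => d.insert n (none : Option Int)) PySem.Dict.empty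
  let init := seeds.foldl
    (fun (p : PySem.Dict String (Option Int) × List String) s => (p.1.insert s (some (0 : Int)), p.2 ++ [s]))
    (dist0, ([] : List String))
  postA nodes types (bfsA adj (3 * nodes.length + 1) init.1 init.2)

-- ===== PORT B =====

-- cands = ([dist[n]] if n in dist else []) + [dist[m] + 1 for m in adj[n] if m in dist]
def bfCands (adj : PySem.Dict String (PySem.Set String)) (dist : PySem.Dict String Int)
    (n : String) : List Int :=
  (if dist.contains n then [dist.getD n 0] else []) ++
    ((adj.getD n PySem.Set.empty).filter (fun m => dist.contains m)).map
      (fun m => dist.getD m 0 + 1)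

-- one synchronous round: for n in order: if cands: new[n] = min(cands)
def bfRound (adj : PySem.Dict String (PySem.Set String)) (order : List String)
    (dist : PySem.Dict String Int) : PySem.Dict String Int :=
  order.foldl (fun (new : PySem.Dict String Int) n =>
      match PySem.List.min? (bfCands adj dist n) (fun x => x) with
      | some v => new.insert n v
      | none => new) PySem.Dict.empty

-- for _ in range(len(order)): dist = one round
def bfRounds (adj : PySem.Dict String (PySem.Set String)) (order : List String) :
    Nat → PySem.Dict String Int → PySem.Dict String Int
  | 0, dist => dist
  | k + 1, dist => bfRounds adj order k (bfRound adj order dist)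

-- Source B's seeds or-chain over the distinct-node order
def seedsOfB (order : List String) (types : PySem.Dict String String) : List String :=
  let s1 := order.filter (fun n => types.getD n "" == "server")
  let s2 := if s1.isEmpty then order.filter (fun n => types.getD n "" == "switch") else s1
  if s2.isEmpty then order.take 1 else s2

-- raw[n] = dist[n] - base if n in dist else 0
def rawBodyB (dist : PySem.Dict String Int) (base : Int)
    (d : PySem.Dict String Int) (n : String) : PySem.Dict String Int :=
  d.insert n (match dist.get? n with | some k => k - base | none => 0)

-- everything after the rounds loop of Source B, on the final dict `dist`
def postB (order : List String) (types : PySem.Dict String String)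
    (dist : PySem.Dict String Int) : List (String × Int) :=
  let finite := order.filterMap (fun n => dist.get? n)   -- [dist[n] for n in order if n in dist]
  let base : Int := pyMinD finite
  let raw := order.foldl (rawBodyB dist base) PySem.Dict.empty
  let top : Int := pyMaxD raw.values
  let lvl := order.foldl (fun (d : PySem.Dict String Int) n =>
      d.insert n (if types.getD n "" == "workstation" then max (raw.getD n 0) top else raw.getD n 0))
      PySem.Dict.empty
  let layers := PySem.List.sorted (PySem.Set.ofList lvl.values) (fun x => x) false
  let rank := mkRank layers
  (order.foldl (fun (d : PySem.Dict String Int) n => d.insert n (rank.getD (lvl.getD n 0) 0))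
      PySem.Dict.empty).items

def assign_layers_alt (nodes : List String) (edges : List (List (String × String))) :
    List (String × Int) :=
  let order := PySem.List.dedup nodes
  let types := buildTypes order
  let adj := buildAdj order edges
  let seeds := seedsOfB order types
  let dist0 := seeds.foldl (fun (d : PySem.Dict String Int) s => d.insert s 0) PySem.Dict.empty
  postB order types (bfRounds adj order order.length dist0)

-- ===== PRECONDITION & SPEC =====
-- Pre_ excludes exactly the inputs where A raises KeyError: an edge dict without an "a" or
-- "b" key, or an edge endpoint that is not a node (adj[…] / dist[…] lookups fail there).
def Pre_assign_layers (nodes : List String) (edges : List (List (String × String))) : Prop :=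
  ∀ e ∈ edges,
    (((PySem.Dict.ofList e).get? "a").any (fun a => nodes.contains a) = true) ∧
    (((PySem.Dict.ofList e).get? "b").any (fun b => nodes.contains b) = true)

instance (nodes : List String) (edges : List (List (String × String))) :
    Decidable (Pre_assign_layers nodes edges) := by unfold Pre_assign_layers; infer_instance

def pvWitness_assign_layers : List String × (List (List (String × String))) :=
  (["ser-1", "sw2", "wss-9", "n4"], [[("a", "ser-1"), ("b", "sw2")], [("a", "sw2"), ("b", "wss-9")]])

def Spec_assign_layers (nodes : List String) (edges : List (List (String × String)))
    (out : List (String × Int)) : Prop := out = assign_layers_alt nodes edges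

instance (nodes : List String) (edges : List (List (String × String))) (out : List (String × Int)) :
    Decidable (Spec_assign_layers nodes edges out) := by unfold Spec_assign_layers; infer_instance

-- ===== CLAIM (what is proved, stated in full; the proofs are below) =====
def Claim_equal_assign_layers : Prop := ∀ (nodes : List String) (edges : List (List (String × String))), Dom_assign_layers nodes edges → Pre_assign_layers nodes edges → Spec_assign_layers nodes edges (assign_layers nodes edges)

-- ===== LEMMAS AND PROOFS =====

-- proof device: level-synchronous BFS, intermediate between A's deque loop and B's rounds
def nbrB (d : Int) (q : PySem.Dict String Int × List String) (v : String) :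
    PySem.Dict String Int × List String :=
  if q.1.contains v then q else (q.1.insert v (d + 1), q.2 ++ [v])

def stepB (adj : PySem.Dict String (PySem.Set String)) (d : Int)
    (p : PySem.Dict String Int × List String) (u : String) : PySem.Dict String Int × List String :=
  (adj.getD u PySem.Set.empty).foldl (nbrB d) p

def bfsB (adj : PySem.Dict String (PySem.Set String)) :
    Nat → PySem.Dict String Int → List String → Int → PySem.Dict String Int
  | 0, dist, _, _ => dist
  | _ + 1, dist, [], _ => dist
  | fuel + 1, dist, frontier, d =>
      let st := frontier.foldl (stepB adj d) (dist, ([] : List String))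
      bfsB adj fuel st.1 st.2 (d + 1)

-- the A-side dist dict determined by the level-BFS visited dict: keys in distinct-node
-- order, value `none` (= inf) exactly where the visited dict has no entry
def AofB (K : List String) (dB : PySem.Dict String Int) : PySem.Dict String (Option Int) :=
  ⟨K.map (fun n => (n, dB.get? n))⟩

-- number of still-unvisited nodes
def Ucnt (K : List String) (dB : PySem.Dict String Int) : Nat :=
  K.countP (fun n => (dB.get? n).isNone)

theorem AofB_keys (K : List String) (dB : PySem.Dict String Int) : (AofB K dB).keys = K := by
  show (K.map (fun n => (n, dB.get? n))).map (fun p => p.1) = K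
  simp [Function.comp_def]

theorem AofB_get?_mem {K : List String} (hK : K.Nodup) (dB : PySem.Dict String Int)
    {n : String} (hn : n ∈ K) : (AofB K dB).get? n = some (dB.get? n) := by
  apply PySem.Dict.get?_of_mem_items
  · exact List.mem_map.mpr ⟨n, hn, rfl⟩
  · rw [AofB_keys]; exact hK

theorem AofB_getD_mem {K : List String} (hK : K.Nodup) (dB : PySem.Dict String Int)
    {n : String} (hn : n ∈ K) : (AofB K dB).getD n none = dB.get? n := by
  rw [PySem.Dict.getD_eq_get?_getD, AofB_get?_mem hK dB hn]; rfl

theorem AofB_insert {K : List String} (hK : K.Nodup) (dB : PySem.Dict String Int)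
    {v : String} (hv : v ∈ K) (x : Int) :
    (AofB K dB).insert v (some x) = AofB K (dB.insert v x) := by
  have hc : (AofB K dB).contains v = true := by
    rw [PySem.Dict.contains_eq_decide_mem_keys, AofB_keys]; simpa
  apply PySem.Dict.ext
  rw [PySem.Dict.items_insert_of_contains _ _ hc]
  show (K.map (fun n => (n, dB.get? n))).map _ = K.map (fun n => (n, (dB.insert v x).get? n))
  rw [List.map_map]
  apply List.map_congr_left
  intro m hm
  by_cases h : m = v
  · subst h; simp [PySem.Dict.get?_insert_self]
  · simp only [Function.comp_apply]
    rw [PySem.Dict.get?_insert_of_ne _ _ h]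
    simp [h]

theorem Ucnt_insert {K : List String} (hK : K.Nodup) {dB : PySem.Dict String Int}
    {v : String} (hv : v ∈ K) (hnone : dB.get? v = none) (x : Int) :
    Ucnt K (dB.insert v x) + 1 = Ucnt K dB := by
  unfold Ucnt
  revert hK hv
  induction K with
  | nil => intro _ hv; cases hv
  | cons a t ih =>
    intro hK hv
    have hK' := List.nodup_cons.mp hK
    rw [List.countP_cons, List.countP_cons]
    rcases List.mem_cons.mp hv with h | h
    · subst h
      have h1 : ((dB.insert v x).get? v).isNone = false := by
        rw [PySem.Dict.get?_insert_self]; rfl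
      have h2 : (dB.get? v).isNone = true := by rw [hnone]; rfl
      have h3 : List.countP (fun n => ((dB.insert v x).get? n).isNone) t
          = List.countP (fun n => (dB.get? n).isNone) t := by
        apply List.countP_congr
        intro n hn
        rw [PySem.Dict.get?_insert_of_ne _ _
          (show n ≠ v by intro e; subst e; exact absurd hn hK'.1)]
      rw [h1, h2, h3]
      simp
    · have hav : a ≠ v := fun e => hK'.1 (e ▸ h)
      rw [PySem.Dict.get?_insert_of_ne _ _ hav]
      have := ih hK'.2 h
      omega

theorem Ucnt_le (K : List String) (dB : PySem.Dict String Int) : Ucnt K dB ≤ K.length := by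
  exact List.countP_le_length

-- graph-building characterisation: inserting f n for each n in l onto a graph dict
theorem graphStep_items {ν : Type} (f : String → ν)
    (step : PySem.Dict String ν → String → PySem.Dict String ν) :
    ∀ (l S : List String), S.Nodup →
      (∀ n ∈ l, ∀ (S' : List String), S'.Nodup →
        step (⟨S'.map (fun m => (m, f m))⟩ : PySem.Dict String ν) n
          = (⟨S'.map (fun m => (m, f m))⟩ : PySem.Dict String ν).insert n (f n)) →
      (l.foldl step (⟨S.map (fun m => (m, f m))⟩ : PySem.Dict String ν)).items
        = (PySem.Set.update S l).map (fun m => (m, f m)) := by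
  intro l
  induction l with
  | nil => intro S hS _; rfl
  | cons n l ih =>
    intro S hS hstep
    rw [List.foldl_cons, hstep n (by simp) S hS]
    have hup : PySem.Set.update S (n :: l) = PySem.Set.update (PySem.Set.add S n) l := rfl
    by_cases hmem : n ∈ S
    · have hc : (⟨S.map (fun m => (m, f m))⟩ : PySem.Dict String ν).contains n = true := by
        rw [PySem.Dict.contains_eq_decide_mem_keys]
        simp [PySem.Dict.keys_mk, Function.comp_def, hmem]
      have heq : (⟨S.map (fun m => (m, f m))⟩ : PySem.Dict String ν).insert n (f n)
          = (⟨S.map (fun m => (m, f m))⟩ : PySem.Dict String ν) := by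
        apply PySem.Dict.ext
        rw [PySem.Dict.items_insert_of_contains _ _ hc]
        show (S.map (fun m => (m, f m))).map _ = S.map (fun m => (m, f m))
        rw [List.map_map]
        apply List.map_congr_left
        intro m _
        by_cases h : m = n
        · subst h; simp
        · simp [h]
      have hadd : PySem.Set.add S n = S := by
        show (if S.contains n then S else S ++ [n]) = S
        have hct : S.contains n = true := by
          show List.elem n S = true
          exact List.elem_iff.mpr hmem
        simp [hct, hmem]
      rw [heq, hup, hadd]
      exact ih S hS (fun m hm => hstep m (by simp [hm]))
    · have hc : (⟨S.map (fun m => (m, f m))⟩ : PySem.Dict String ν).contains n = false := by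
        rw [PySem.Dict.contains_eq_decide_mem_keys]
        simp [PySem.Dict.keys_mk, Function.comp_def, hmem]
      have heq : (⟨S.map (fun m => (m, f m))⟩ : PySem.Dict String ν).insert n (f n)
          = (⟨(S ++ [n]).map (fun m => (m, f m))⟩ : PySem.Dict String ν) := by
        apply PySem.Dict.ext
        rw [PySem.Dict.items_insert_of_not_contains _ _ hc]
        show S.map (fun m => (m, f m)) ++ [(n, f n)] = (S ++ [n]).map (fun m => (m, f m))
        simp
      have hadd : PySem.Set.add S n = S ++ [n] := by
        show (if S.contains n then S else S ++ [n]) = S ++ [n]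
        exact if_neg (by simp [hmem])
      rw [heq, hup, hadd]
      refine ih (S ++ [n]) ?_ (fun m hm => hstep m (by simp [hm]))
      simp [List.nodup_append, hS]
      exact fun a ha e => hmem (e ▸ ha)

theorem buildMap_items {ν : Type} (f : String → ν) (l : List String) :
    (l.foldl (fun (d : PySem.Dict String ν) n => d.insert n (f n)) PySem.Dict.empty).items
      = (PySem.Set.ofList l).map (fun m => (m, f m)) := by
  have h0 : (PySem.Dict.empty : PySem.Dict String ν)
      = (⟨([] : List String).map (fun m => (m, f m))⟩ : PySem.Dict String ν) := rfl
  rw [h0]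
  exact graphStep_items f _ l [] List.nodup_nil (fun n _ S' _ => rfl)

theorem buildConst_items {ν : Type} (c : ν) (l : List String) :
    (l.foldl (fun (d : PySem.Dict String ν) n => d.insert n c) PySem.Dict.empty).items
      = (PySem.Set.ofList l).map (fun m => (m, c)) := by
  have h0 : (PySem.Dict.empty : PySem.Dict String ν)
      = (⟨([] : List String).map (fun m => (m, c))⟩ : PySem.Dict String ν) := rfl
  rw [h0]
  exact graphStep_items (fun _ => c) _ l [] List.nodup_nil (fun n _ S' _ => rfl)

theorem set_update_prefix : ∀ (l S : List String), ∃ t, PySem.Set.update S l = S ++ t := by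
  intro l
  induction l with
  | nil =>
    intro S
    exact ⟨[], by rw [show PySem.Set.update S [] = S from rfl]; simp⟩
  | cons x l ih =>
    intro S
    have hup : PySem.Set.update S (x :: l) = PySem.Set.update (PySem.Set.add S x) l := rfl
    have hadd : PySem.Set.add S x = S ∨ PySem.Set.add S x = S ++ [x] := by
      by_cases h : S.contains x = true
      · left; show (if S.contains x then S else S ++ [x]) = S
        exact if_pos h
      · right; show (if S.contains x then S else S ++ [x]) = S ++ [x]
        exact if_neg h
    obtain ⟨t, ht⟩ := ih (PySem.Set.add S x)
    rcases hadd with h | h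
    · exact ⟨t, by rw [hup, ht, h]⟩
    · exact ⟨[x] ++ t, by rw [hup, ht, h]; simp⟩
-- ----- level-BFS bookkeeping (unchanged from the A-side simulation) -----

theorem foldB_mono {d : Int} : ∀ (ns : List String) (p : PySem.Dict String Int × List String)
    (n : String) (k : Int), p.1.get? n = some k → ((ns.foldl (nbrB d) p).1).get? n = some k := by
  intro ns
  induction ns with
  | nil => intro p n k h; exact h
  | cons v ns ih =>
    intro p n k h
    rw [List.foldl_cons]
    apply ih
    unfold nbrB
    split
    · exact h
    · next hc =>
      have hv : p.1.get? v = none := by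
        rw [PySem.Dict.get?_eq_none_iff_contains]; simpa using hc
      have hne : n ≠ v := by intro e; rw [e, hv] at h; cases h
      show ((p.1.insert v (d + 1)).get? n) = some k
      rw [PySem.Dict.get?_insert_of_ne _ _ hne]; exact h

theorem foldB_vals {d : Int} : ∀ (ns : List String) (p : PySem.Dict String Int × List String)
    (n : String) (k : Int), ((ns.foldl (nbrB d) p).1).get? n = some k →
      p.1.get? n = some k ∨ k = d + 1 := by
  intro ns
  induction ns with
  | nil => intro p n k h; exact Or.inl h
  | cons v ns ih =>
    intro p n k h
    rw [List.foldl_cons] at h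
    rcases ih _ n k h with h' | h'
    · unfold nbrB at h'
      split at h'
      · exact Or.inl h'
      · show p.1.get? n = some k ∨ _
        by_cases e : n = v
        · subst e
          rw [PySem.Dict.get?_insert_self] at h'
          exact Or.inr (by injection h'; omega)
        · rw [PySem.Dict.get?_insert_of_ne _ _ e] at h'
          exact Or.inl h'
    · exact Or.inr h'

theorem foldB_facts {K : List String} (hK : K.Nodup) {d : Int} :
    ∀ (ns : List String) (dB : PySem.Dict String Int) (nxt : List String),
      (∀ v ∈ ns, v ∈ K) → (∀ x ∈ nxt, dB.get? x = some (d + 1)) →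
      (∀ n k, ((ns.foldl (nbrB d) (dB, nxt)).1).get? n = some k →
          dB.get? n = some k ∨ (k = d + 1 ∧ n ∈ K)) ∧
      (∀ x ∈ (ns.foldl (nbrB d) (dB, nxt)).2,
          ((ns.foldl (nbrB d) (dB, nxt)).1).get? x = some (d + 1)) ∧
      (Ucnt K (ns.foldl (nbrB d) (dB, nxt)).1 + ((ns.foldl (nbrB d) (dB, nxt)).2).length
        = Ucnt K dB + nxt.length) := by
  intro ns
  induction ns with
  | nil =>
    intro dB nxt _ hnxt
    exact ⟨fun n k h => Or.inl h, hnxt, rfl⟩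
  | cons v ns ih =>
    intro dB nxt hns hnxt
    rw [List.foldl_cons]
    by_cases hc : dB.contains v = true
    · have hv : nbrB d (dB, nxt) v = (dB, nxt) := by simp [nbrB, hc]
      rw [hv]
      exact ih dB nxt (fun w hw => hns w (by simp [hw])) hnxt
    · have hc' : dB.contains v = false := by rwa [Bool.not_eq_true] at hc
      have hv : nbrB d (dB, nxt) v = (dB.insert v (d + 1), nxt ++ [v]) := by simp [nbrB, hc']
      rw [hv]
      have hvnone : dB.get? v = none := (PySem.Dict.get?_eq_none_iff_contains _ _).mpr hc'
      have hmono1 : ∀ n k, dB.get? n = some k → (dB.insert v (d + 1)).get? n = some k := by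
        intro n k h
        have hne : n ≠ v := by intro e; rw [e, hvnone] at h; cases h
        rw [PySem.Dict.get?_insert_of_ne _ _ hne]; exact h
      have hnxt' : ∀ x ∈ nxt ++ [v], (dB.insert v (d + 1)).get? x = some (d + 1) := by
        intro x hx
        rcases List.mem_append.mp hx with h | h
        · exact hmono1 x _ (hnxt x h)
        · have : x = v := by simpa using h
          subst this; exact PySem.Dict.get?_insert_self _ _ _
      obtain ⟨iv, il, iu⟩ := ih (dB.insert v (d + 1)) (nxt ++ [v])
        (fun w hw => hns w (by simp [hw])) hnxt'
      refine ⟨?_, il, ?_⟩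
      · intro n k h
        rcases iv n k h with h' | h'
        · by_cases e : n = v
          · subst e
            rw [PySem.Dict.get?_insert_self] at h'
            exact Or.inr ⟨by injection h' with h''; omega, hns _ (by simp)⟩
          · rw [PySem.Dict.get?_insert_of_ne _ _ e] at h'
            exact Or.inl h'
        · exact Or.inr ⟨h'.1, h'.2⟩
      · have hU := Ucnt_insert hK (hns v (by simp)) hvnone (d + 1)
        have hl : (nxt ++ [v]).length = nxt.length + 1 := by simp
        omega

theorem rowFacts {K : List String} (hK : K.Nodup)
    {adj : PySem.Dict String (PySem.Set String)}
    (hadj : ∀ u v, v ∈ adj.getD u PySem.Set.empty → v ∈ K) {d : Int} :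
    ∀ (f : List String) (dB : PySem.Dict String Int) (nxt : List String),
      (∀ u ∈ f, dB.get? u = some d) → (∀ x ∈ nxt, dB.get? x = some (d + 1)) →
      (∀ n k, dB.get? n = some k → k ≤ d + 1) → (∀ n k, dB.get? n = some k → n ∈ K) →
      (∀ n k, ((f.foldl (stepB adj d) (dB, nxt)).1).get? n = some k → k ≤ d + 1) ∧
      (∀ n k, ((f.foldl (stepB adj d) (dB, nxt)).1).get? n = some k → n ∈ K) ∧
      (∀ x ∈ (f.foldl (stepB adj d) (dB, nxt)).2,
          ((f.foldl (stepB adj d) (dB, nxt)).1).get? x = some (d + 1)) ∧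
      (Ucnt K (f.foldl (stepB adj d) (dB, nxt)).1 + ((f.foldl (stepB adj d) (dB, nxt)).2).length
        = Ucnt K dB + nxt.length) := by
  intro f
  induction f with
  | nil => intro dB nxt hf hnxt hb hkeys; exact ⟨hb, hkeys, hnxt, rfl⟩
  | cons u f ih =>
    intro dB nxt hf hnxt hb hkeys
    rw [List.foldl_cons]
    obtain ⟨fv, fl, fu⟩ := foldB_facts hK (adj.getD u PySem.Set.empty) dB nxt
      (fun v hv => hadj u v hv) hnxt
    have hb' : ∀ n k, (stepB adj d (dB, nxt) u).1.get? n = some k → k ≤ d + 1 := by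
      intro n k h
      rcases fv n k h with h' | h'
      · exact hb n k h'
      · omega
    have hkeys' : ∀ n k, (stepB adj d (dB, nxt) u).1.get? n = some k → n ∈ K := by
      intro n k h
      rcases fv n k h with h' | h'
      · exact hkeys n k h'
      · exact h'.2
    have hf' : ∀ w ∈ f, (stepB adj d (dB, nxt) u).1.get? w = some d := by
      intro w hw
      exact foldB_mono _ _ _ _ (hf w (by simp [hw]))
    obtain ⟨c1, c2, c3, c4⟩ := ih (stepB adj d (dB, nxt) u).1 (stepB adj d (dB, nxt) u).2
      hf' fl hb' hkeys'
    simp only [Prod.mk.eta] at c1 c2 c3 c4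
    have hst : stepB adj d (dB, nxt) u
        = (adj.getD u PySem.Set.empty).foldl (nbrB d) (dB, nxt) := rfl
    rw [hst] at c4
    rw [hst]
    exact ⟨c1, c2, c3, by omega⟩

theorem innerSim {K : List String} (hK : K.Nodup) {u : String} {d : Int} (hu : u ∈ K) :
    ∀ (ns : List String) (dB : PySem.Dict String Int) (rest nxt : List String),
      (∀ v ∈ ns, v ∈ K) → dB.get? u = some d → (∀ n k, dB.get? n = some k → k ≤ d + 1) →
      ns.foldl (nbrA u) (AofB K dB, rest ++ nxt)
        = (AofB K (ns.foldl (nbrB d) (dB, nxt)).1, rest ++ (ns.foldl (nbrB d) (dB, nxt)).2) := by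
  intro ns
  induction ns with
  | nil => intro dB rest nxt _ _ _; rfl
  | cons v ns ih =>
    intro dB rest nxt hns hu' hb
    rw [List.foldl_cons, List.foldl_cons]
    have hvK : v ∈ K := hns v (by simp)
    have hgu : (AofB K dB).getD u none = some d := by rw [AofB_getD_mem hK _ hu, hu']
    have hgv : (AofB K dB).getD v none = dB.get? v := AofB_getD_mem hK _ hvK
    cases hv : dB.get? v with
    | some k =>
      have hk : k ≤ d + 1 := hb v k hv
      have hA : nbrA u (AofB K dB, rest ++ nxt) v = (AofB K dB, rest ++ nxt) := by
        unfold nbrA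
        rw [hgu]
        rw [show (AofB K dB, rest ++ nxt).1.getD v none = some k from by rw [hgv, hv]]
        simp [pyGtInf, pyAddOneInf, show ¬ (d + 1 < k) by omega]
      have hcv : dB.contains v = true := by
        cases hcase : dB.contains v
        · exact absurd ((PySem.Dict.get?_eq_none_iff_contains _ _).mpr hcase) (by simp [hv])
        · rfl
      have hB : nbrB d (dB, nxt) v = (dB, nxt) := by simp [nbrB, hcv]
      rw [hA, hB]
      exact ih dB rest nxt (fun w hw => hns w (by simp [hw])) hu' hb
    | none =>
      have hune : u ≠ v := by intro e; rw [e, hv] at hu'; cases hu'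
      have hA : nbrA u (AofB K dB, rest ++ nxt) v
          = (AofB K (dB.insert v (d + 1)), rest ++ (nxt ++ [v])) := by
        unfold nbrA
        rw [hgu]
        rw [show (AofB K dB, rest ++ nxt).1.getD v none = none from by rw [hgv, hv]]
        simp only [pyGtInf, pyAddOneInf, if_true]
        rw [AofB_insert hK dB hvK, List.append_assoc]
      have hcv : dB.contains v = false := (PySem.Dict.get?_eq_none_iff_contains _ _).mp hv
      have hB : nbrB d (dB, nxt) v = (dB.insert v (d + 1), nxt ++ [v]) := by simp [nbrB, hcv]
      rw [hA, hB]
      apply ih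
      · exact fun w hw => hns w (by simp [hw])
      · rw [PySem.Dict.get?_insert_of_ne _ _ hune]; exact hu'
      · intro n k h
        by_cases e : n = v
        · subst e
          rw [PySem.Dict.get?_insert_self] at h
          injection h with h'; omega
        · rw [PySem.Dict.get?_insert_of_ne _ _ e] at h
          exact hb n k h

theorem simRow {K : List String} (hK : K.Nodup)
    {adj : PySem.Dict String (PySem.Set String)}
    (hadj : ∀ u v, v ∈ adj.getD u PySem.Set.empty → v ∈ K) {d : Int} :
    ∀ (f : List String) (dB : PySem.Dict String Int) (nxt : List String) (fuelA : Nat),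
      (∀ u ∈ f, dB.get? u = some d) → (∀ x ∈ nxt, dB.get? x = some (d + 1)) →
      (∀ n k, dB.get? n = some k → k ≤ d + 1) → (∀ n k, dB.get? n = some k → n ∈ K) →
      f.length ≤ fuelA →
      bfsA adj fuelA (AofB K dB) (f ++ nxt)
        = bfsA adj (fuelA - f.length) (AofB K (f.foldl (stepB adj d) (dB, nxt)).1)
            ((f.foldl (stepB adj d) (dB, nxt)).2) := by
  intro f
  induction f with
  | nil => intro dB nxt fuelA _ _ _ _ _; simp
  | cons u f ih =>
    intro dB nxt fuelA hf hnxt hb hkeys hfuel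
    cases fuelA with
    | zero => simp at hfuel
    | succ fa =>
      have hu : u ∈ K := hkeys u d (hf u (by simp))
      rw [List.cons_append]
      rw [show bfsA adj (fa + 1) (AofB K dB) (u :: (f ++ nxt))
          = bfsA adj fa ((adj.getD u PySem.Set.empty).foldl (nbrA u) (AofB K dB, f ++ nxt)).1
              ((adj.getD u PySem.Set.empty).foldl (nbrA u) (AofB K dB, f ++ nxt)).2 from rfl]
      rw [innerSim hK hu (adj.getD u PySem.Set.empty) dB f nxt
        (fun v hv => hadj u v hv) (hf u (by simp)) hb]
      obtain ⟨fv, fl, _⟩ := foldB_facts hK (adj.getD u PySem.Set.empty) dB nxt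
        (fun v hv => hadj u v hv) hnxt
      have hb' : ∀ n k, (stepB adj d (dB, nxt) u).1.get? n = some k → k ≤ d + 1 := by
        intro n k h
        rcases fv n k h with h' | h'
        · exact hb n k h'
        · omega
      have hkeys' : ∀ n k, (stepB adj d (dB, nxt) u).1.get? n = some k → n ∈ K := by
        intro n k h
        rcases fv n k h with h' | h'
        · exact hkeys n k h'
        · exact h'.2
      have hf' : ∀ w ∈ f, (stepB adj d (dB, nxt) u).1.get? w = some d := by
        intro w hw
        exact foldB_mono _ _ _ _ (hf w (by simp [hw]))
      have := ih (stepB adj d (dB, nxt) u).1 (stepB adj d (dB, nxt) u).2 fa hf' fl hb' hkeys'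
        (by simpa using hfuel)
      rw [List.foldl_cons]
      rw [show (fa + 1 - (u :: f).length) = fa - f.length from by simp]
      exact this

theorem simLevel {K : List String} (hK : K.Nodup)
    {adj : PySem.Dict String (PySem.Set String)}
    (hadj : ∀ u v, v ∈ adj.getD u PySem.Set.empty → v ∈ K) :
    ∀ (fuelB : Nat) (frontier : List String) (d : Int) (dB : PySem.Dict String Int) (fuelA : Nat),
      (∀ u ∈ frontier, dB.get? u = some d) →
      (∀ n k, dB.get? n = some k → k ≤ d + 1) → (∀ n k, dB.get? n = some k → n ∈ K) →
      frontier.length + 2 * Ucnt K dB + 1 ≤ fuelA → Ucnt K dB + 2 ≤ fuelB →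
      bfsA adj fuelA (AofB K dB) frontier = AofB K (bfsB adj fuelB dB frontier d) := by
  intro fuelB
  induction fuelB with
  | zero => intro frontier d dB fuelA _ _ _ _ hfB; omega
  | succ fb ih =>
    intro frontier d dB fuelA hf hb hkeys hfA hfB
    cases frontier with
    | nil =>
      cases fuelA with
      | zero => omega
      | succ fa => rfl
    | cons u fr =>
      rw [show bfsB adj (fb + 1) dB (u :: fr) d
          = bfsB adj fb ((u :: fr).foldl (stepB adj d) (dB, ([] : List String))).1
              ((u :: fr).foldl (stepB adj d) (dB, ([] : List String))).2 (d + 1) from rfl]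
      have hrow := simRow hK hadj (u :: fr) dB [] fuelA hf (by simp) hb hkeys (by omega)
      rw [List.append_nil] at hrow
      rw [hrow]
      obtain ⟨c1, c2, c3, c4⟩ := rowFacts hK hadj (u :: fr) dB [] hf (by simp) hb hkeys
      cases hst2 : ((u :: fr).foldl (stepB adj d) (dB, ([] : List String))).2 with
      | nil =>
        obtain ⟨m, hm⟩ : ∃ m, fuelA - (u :: fr).length = m + 1 :=
          ⟨fuelA - (u :: fr).length - 1, by simp only [List.length_cons] at hfA ⊢; omega⟩
        obtain ⟨mb, hmb⟩ : ∃ mb, fb = mb + 1 := ⟨fb - 1, by omega⟩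
        rw [hm, hmb]
        rfl
      | cons y t =>
        rw [hst2] at c3 c4
        have hb' : ∀ n k, ((u :: fr).foldl (stepB adj d) (dB, ([] : List String))).1.get? n
            = some k → k ≤ (d + 1) + 1 := by
          intro n k h; have := c1 n k h; omega
        refine ih (y :: t) (d + 1) _ (fuelA - (u :: fr).length) c3 hb' c2 ?_ ?_
        · simp only [List.length_cons, List.length_nil] at hfA c4 ⊢
          omega
        · simp only [List.length_cons, List.length_nil] at c4
          omega

theorem rowMono {adj : PySem.Dict String (PySem.Set String)} {d : Int} :
    ∀ (f : List String) (p : PySem.Dict String Int × List String) (n : String) (k : Int),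
      p.1.get? n = some k → ((f.foldl (stepB adj d) p).1).get? n = some k := by
  intro f
  induction f with
  | nil => intro p n k h; exact h
  | cons u f ih =>
    intro p n k h
    rw [List.foldl_cons]
    exact ih _ n k (foldB_mono _ _ _ _ h)

theorem rowVals {adj : PySem.Dict String (PySem.Set String)} {d : Int} :
    ∀ (f : List String) (p : PySem.Dict String Int × List String) (n : String) (k : Int),
      ((f.foldl (stepB adj d) p).1).get? n = some k → p.1.get? n = some k ∨ k = d + 1 := by
  intro f
  induction f with
  | nil => intro p n k h; exact Or.inl h
  | cons u f ih =>
    intro p n k h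
    rw [List.foldl_cons] at h
    rcases ih _ n k h with h' | h'
    · exact foldB_vals _ _ _ _ h'
    · exact Or.inr h'

theorem update_disjoint : ∀ (l S : List String), (∀ x ∈ l, x ∉ S) → l.Nodup →
    PySem.Set.update S l = S ++ l := by
  intro l
  induction l with
  | nil => intro S _ _; rw [show PySem.Set.update S [] = S from rfl]; simp
  | cons x l ih =>
    intro S hdisj hnd
    have hup : PySem.Set.update S (x :: l) = PySem.Set.update (PySem.Set.add S x) l := rfl
    have hadd : PySem.Set.add S x = S ++ [x] := by
      show (if S.contains x then S else S ++ [x]) = S ++ [x]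
      exact if_neg (by simp [hdisj x (by simp)])
    have hdisj2 : ∀ y ∈ l, y ∉ S ++ [x] := by
      intro y hy
      simp only [List.mem_append, List.mem_singleton]
      rintro (h | h)
      · exact hdisj y (by simp [hy]) h
      · exact (List.nodup_cons.mp hnd).1 (h ▸ hy)
    rw [hup, hadd, ih (S ++ [x]) hdisj2 (List.nodup_cons.mp hnd).2]
    simp

theorem ofList_self {l : List String} (h : l.Nodup) : PySem.Set.ofList l = l := by
  have h1 : PySem.Set.ofList l = PySem.Set.update [] l := rfl
  rw [h1, update_disjoint l [] (by simp) h]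
  simp

theorem ofList_cons (a : String) (l : List String) :
    ∃ t, PySem.Set.ofList (a :: l) = a :: t := by
  have h1 : PySem.Set.ofList (a :: l) = PySem.Set.update [a] l := rfl
  obtain ⟨t, ht⟩ := set_update_prefix l [a]
  exact ⟨t, by rw [h1, ht]; rfl⟩

theorem update_length_le : ∀ (l S : List String),
    (PySem.Set.update S l).length ≤ S.length + l.length := by
  intro l
  induction l with
  | nil => intro S; rw [show PySem.Set.update S [] = S from rfl]; simp
  | cons x l ih =>
    intro S
    have hup : PySem.Set.update S (x :: l) = PySem.Set.update (PySem.Set.add S x) l := rfl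
    have hadd : (PySem.Set.add S x).length ≤ S.length + 1 := by
      show (if S.contains x then S else S ++ [x]).length ≤ S.length + 1
      split <;> simp
    have := ih (PySem.Set.add S x)
    rw [hup]
    simp only [List.length_cons]
    omega

theorem ofList_length_le (l : List String) : (PySem.Set.ofList l).length ≤ l.length := by
  have h1 : PySem.Set.ofList l = PySem.Set.update [] l := rfl
  have := update_length_le l []
  rw [h1]
  simpa using this

theorem seedDict_get? {S : List String} (hS : S.Nodup) :
    ∀ n, (S.foldl (fun (d : PySem.Dict String Int) s => d.insert s 0) PySem.Dict.empty).get? n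
      = if n ∈ S then some 0 else none := by
  intro n
  have hitems : (S.foldl (fun (d : PySem.Dict String Int) s => d.insert s 0)
      PySem.Dict.empty).items = S.map (fun s => (s, (0 : Int))) := by
    have := PySem.Dict.items_foldl_insert_fresh S (fun s => s) (fun _ => (0 : Int))
      PySem.Dict.empty (fun a _ => PySem.Dict.contains_empty a) (by simpa using hS)
    simpa using this
  have hkeys : (S.foldl (fun (d : PySem.Dict String Int) s => d.insert s 0)
      PySem.Dict.empty).keys = S := by
    show ((S.foldl (fun (d : PySem.Dict String Int) s => d.insert s 0)
      PySem.Dict.empty).items).map (fun p => p.1) = S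
    rw [hitems, List.map_map]
    simp [Function.comp_def]
  by_cases hn : n ∈ S
  · rw [if_pos hn]
    apply PySem.Dict.get?_of_mem_items
    · rw [hitems]; exact List.mem_map.mpr ⟨n, hn, rfl⟩
    · rw [hkeys]; exact hS
  · rw [if_neg hn, PySem.Dict.get?_eq_none_iff_not_mem_keys, hkeys]
    exact hn

theorem rowKeys {adj : PySem.Dict String (PySem.Set String)} {d : Int} :
    ∀ (f : List String) (p : PySem.Dict String Int × List String) (n : String) (k : Int),
      ((f.foldl (stepB adj d) p).1).get? n = some k →
        p.1.get? n = some k ∨ ∃ u ∈ f, n ∈ adj.getD u PySem.Set.empty := by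
  intro f
  induction f with
  | nil => intro p n k h; exact Or.inl h
  | cons u f ih =>
    intro p n k h
    rw [List.foldl_cons] at h
    rcases ih _ n k h with h' | h'
    · have hfb : ∀ (ns : List String) (p' : PySem.Dict String Int × List String),
          ((ns.foldl (nbrB d) p').1).get? n = some k → p'.1.get? n = some k ∨ n ∈ ns := by
        intro ns
        induction ns with
        | nil => intro p' hh; exact Or.inl hh
        | cons v ns ih2 =>
          intro p' hh
          rw [List.foldl_cons] at hh
          rcases ih2 _ hh with hh' | hh'
          · unfold nbrB at hh'
            split at hh'
            · exact Or.inl hh'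
            · by_cases e : n = v
              · exact Or.inr (by simp [e])
              · rw [PySem.Dict.get?_insert_of_ne _ _ e] at hh'
                exact Or.inl hh'
          · exact Or.inr (by simp [hh'])
      rcases hfb _ _ h' with h'' | h''
      · exact Or.inl h''
      · exact Or.inr ⟨u, by simp, h''⟩
    · obtain ⟨u', hu', hm⟩ := h'
      exact Or.inr ⟨u', by simp [hu'], hm⟩
theorem passA_items (dB : PySem.Dict String Int) {K : List String} (hK : K.Nodup)
    (l : List String) (hl : ∀ n ∈ l, n ∈ K) :
    (l.foldl (passBodyA (AofB K dB) 0) PySem.Dict.empty).items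
      = (PySem.Set.ofList l).map (fun m => (m, (dB.get? m).getD 0)) := by
  have h0 : (PySem.Dict.empty : PySem.Dict String Int)
      = (⟨([] : List String).map (fun m => (m, (dB.get? m).getD 0))⟩ : PySem.Dict String Int) := rfl
  rw [h0]
  refine graphStep_items (fun m => (dB.get? m).getD 0) _ l [] List.nodup_nil ?_
  intro n hn S' hS'
  have hkeys : (⟨S'.map (fun m => (m, (dB.get? m).getD 0))⟩ : PySem.Dict String Int).keys = S' := by
    rw [PySem.Dict.keys_mk, List.map_map]
    simp [Function.comp_def]
  unfold passBodyA
  by_cases hmem : n ∈ S'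
  · have hget : (⟨S'.map (fun m => (m, (dB.get? m).getD 0))⟩ : PySem.Dict String Int).get? n
        = some ((dB.get? n).getD 0) := by
      apply PySem.Dict.get?_of_mem_items
      · exact List.mem_map.mpr ⟨n, hmem, rfl⟩
      · rw [hkeys]; exact hS'
    rw [hget]
    simp
  · have hget : (⟨S'.map (fun m => (m, (dB.get? m).getD 0))⟩ : PySem.Dict String Int).get? n
        = none := by
      rw [PySem.Dict.get?_eq_none_iff_not_mem_keys, hkeys]
      exact hmem
    rw [hget, AofB_getD_mem hK dB (hl n hn)]
    cases hdb : dB.get? n with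
    | none => simp [hdb]
    | some k => simp [hdb]

theorem contains_mono (d : PySem.Dict String Int) (k k' : String) (v : Int)
    (h : d.contains k' = true) : (d.insert k v).contains k' = true := by
  rw [PySem.Dict.contains_insert]
  simp [h]

theorem wsPass_keys (max_d : Int) : ∀ (pl : List (String × String)) (d : PySem.Dict String Int),
    (∀ p ∈ pl, d.contains p.1 = true) →
    (pl.foldl (fun (d2 : PySem.Dict String Int) p =>
        if p.2 == "workstation" then d2.insert p.1 (max (d2.getD p.1 0) max_d) else d2) d).keys
      = d.keys := by
  intro pl
  induction pl with
  | nil => intro d _; rfl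
  | cons p pl ih =>
    intro d hc
    rw [List.foldl_cons]
    by_cases hws : (p.2 == "workstation") = true
    · have hstep : (if p.2 == "workstation" then d.insert p.1 (max (d.getD p.1 0) max_d) else d)
          = d.insert p.1 (max (d.getD p.1 0) max_d) := if_pos hws
      rw [hstep, ih _ (fun q hq => contains_mono _ _ _ _ (hc q (by simp [hq]))),
        PySem.Dict.keys_insert_of_contains d _ (hc p (by simp))]
    · have hstep : (if p.2 == "workstation" then d.insert p.1 (max (d.getD p.1 0) max_d) else d)
          = d := if_neg hws
      rw [hstep]
      exact ih d (fun q hq => hc q (by simp [hq]))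

theorem wsPass_get?_not_mem (max_d : Int) : ∀ (pl : List (String × String))
    (d : PySem.Dict String Int) (n : String), n ∉ pl.map Prod.fst →
    (pl.foldl (fun (d2 : PySem.Dict String Int) p =>
        if p.2 == "workstation" then d2.insert p.1 (max (d2.getD p.1 0) max_d) else d2) d).get? n
      = d.get? n := by
  intro pl
  induction pl with
  | nil => intro d n _; rfl
  | cons p pl ih =>
    intro d n hn
    rw [List.foldl_cons]
    have hn1 : n ≠ p.1 := by
      intro e; exact hn (by simp [e])
    have hn2 : n ∉ pl.map Prod.fst := fun h => hn (by simp [h])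
    rw [ih _ n hn2]
    by_cases hws : (p.2 == "workstation") = true
    · rw [if_pos hws, PySem.Dict.get?_insert_of_ne _ _ hn1]
    · rw [if_neg hws]

theorem wsPass_get?_mem (max_d : Int) : ∀ (pl : List (String × String))
    (d : PySem.Dict String Int) (n : String) (t : String),
    (pl.map Prod.fst).Nodup → (n, t) ∈ pl →
    (pl.foldl (fun (d2 : PySem.Dict String Int) p =>
        if p.2 == "workstation" then d2.insert p.1 (max (d2.getD p.1 0) max_d) else d2) d).get? n
      = if t == "workstation" then some (max (d.getD n 0) max_d) else d.get? n := by
  intro pl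
  induction pl with
  | nil => intro d n t _ h; cases h
  | cons p pl ih =>
    intro d n t hnd hmem
    rw [List.foldl_cons]
    rcases List.mem_cons.mp hmem with h | h
    · have hnot : n ∉ pl.map Prod.fst := by
        have h1 := (List.nodup_cons.mp hnd).1
        rw [← h] at h1
        exact h1
      rw [wsPass_get?_not_mem max_d pl _ n hnot, ← h]
      by_cases hws : (t == "workstation") = true
      · simp [hws, PySem.Dict.get?_insert_self]
      · simp [hws]
    · have hne : n ≠ p.1 := by
        intro e
        exact (List.nodup_cons.mp hnd).1 (e ▸ List.mem_map.mpr ⟨(n, t), h, rfl⟩)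
      rw [ih _ n t (List.nodup_cons.mp hnd).2 h]
      by_cases hws : (p.2 == "workstation") = true
      · rw [if_pos hws, PySem.Dict.getD_insert_of_ne _ _ _ hne, PySem.Dict.get?_insert_of_ne _ _ hne]
      · rw [if_neg hws]

theorem remap_keys (rank : PySem.Dict Int Int) : ∀ (ks : List String) (d : PySem.Dict String Int),
    (∀ x ∈ ks, d.contains x = true) →
    (ks.foldl (fun (d : PySem.Dict String Int) n =>
        d.insert n (rank.getD (d.getD n 0) 0)) d).keys = d.keys := by
  intro ks
  induction ks with
  | nil => intro d _; rfl
  | cons x ks ih =>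
    intro d hc
    rw [List.foldl_cons,
      ih _ (fun q hq => contains_mono _ _ _ _ (hc q (by simp [hq]))),
      PySem.Dict.keys_insert_of_contains d _ (hc x (by simp))]

theorem remap_get?_not_mem (rank : PySem.Dict Int Int) : ∀ (ks : List String)
    (d : PySem.Dict String Int) (n : String), n ∉ ks →
    (ks.foldl (fun (d : PySem.Dict String Int) n =>
        d.insert n (rank.getD (d.getD n 0) 0)) d).get? n = d.get? n := by
  intro ks
  induction ks with
  | nil => intro d n _; rfl
  | cons x ks ih =>
    intro d n hn
    rw [List.foldl_cons, ih _ n (fun h => hn (by simp [h])),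
      PySem.Dict.get?_insert_of_ne _ _ (fun e => hn (by simp [e]))]

theorem remap_get?_mem (rank : PySem.Dict Int Int) : ∀ (ks : List String)
    (d : PySem.Dict String Int) (n : String), ks.Nodup → n ∈ ks →
    (ks.foldl (fun (d : PySem.Dict String Int) n =>
        d.insert n (rank.getD (d.getD n 0) 0)) d).get? n
      = some (rank.getD (d.getD n 0) 0) := by
  intro ks
  induction ks with
  | nil => intro d n _ h; cases h
  | cons x ks ih =>
    intro d n hnd hmem
    rw [List.foldl_cons]
    rcases List.mem_cons.mp hmem with h | h
    · subst h
      rw [remap_get?_not_mem rank ks _ n (List.nodup_cons.mp hnd).1,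
        PySem.Dict.get?_insert_self]
    · have hne : n ≠ x := by
        intro e
        exact (List.nodup_cons.mp hnd).1 (e ▸ h)
      rw [ih _ n (List.nodup_cons.mp hnd).2 h, PySem.Dict.getD_insert_of_ne _ _ _ hne]

theorem baseAdj_getD (K : List String) (u : String) :
    (K.foldl (fun (d : PySem.Dict String (PySem.Set String)) n =>
      d.insert n PySem.Set.empty) PySem.Dict.empty).getD u PySem.Set.empty
      = PySem.Set.empty := by
  rw [PySem.Dict.getD_eq_get?_getD]
  cases hg : (K.foldl (fun (d : PySem.Dict String (PySem.Set String)) n =>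
      d.insert n PySem.Set.empty) PySem.Dict.empty).get? u with
  | none => rfl
  | some sOut =>
    have hmem := PySem.Dict.mem_items_of_get?_eq_some _ hg
    rw [buildConst_items] at hmem
    obtain ⟨m, _, hm⟩ := List.mem_map.mp hmem
    have : sOut = PySem.Set.empty := by
      have := congrArg Prod.snd hm
      simpa using this.symm
    rw [this]
    rfl

theorem adjVals {K : List String} (edges : List (List (String × String)))
    (hE : ∀ e ∈ edges, ∃ a b, (PySem.Dict.ofList e).get? "a" = some a ∧
      (PySem.Dict.ofList e).get? "b" = some b ∧ a ∈ K ∧ b ∈ K) :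
    ∀ u v, v ∈ (buildAdj K edges).getD u PySem.Set.empty → v ∈ K := by
  suffices h : ∀ (es : List (List (String × String))) (d : PySem.Dict String (PySem.Set String)),
      (∀ e ∈ es, ∃ a b, (PySem.Dict.ofList e).get? "a" = some a ∧
        (PySem.Dict.ofList e).get? "b" = some b ∧ a ∈ K ∧ b ∈ K) →
      (∀ u v, v ∈ d.getD u PySem.Set.empty → v ∈ K) →
      ∀ u v, v ∈ (es.foldl edgeAdd d).getD u PySem.Set.empty → v ∈ K by
    intro u v hv
    refine h edges _ hE ?_ u v hv
    intro u' v' hv'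
    rw [baseAdj_getD] at hv'
    cases hv'
  intro es
  induction es with
  | nil => intro d _ hd u v hv; exact hd u v hv
  | cons e es ih =>
    intro d hes hd u v hv
    rw [List.foldl_cons] at hv
    refine ih _ (fun e' he' => hes e' (by simp [he'])) ?_ u v hv
    intro u' v' hv'
    obtain ⟨a, b, hga, hgb, haK, hbK⟩ := hes e (by simp)
    unfold edgeAdd at hv'
    simp only [hga, hgb] at hv'
    rw [PySem.Dict.getD_modify] at hv'
    by_cases h1 : u' = b
    · rw [if_pos h1] at hv'
      rcases (PySem.Set.mem_add _ _ _).mp hv' with h | h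
      · rw [PySem.Dict.getD_modify] at h
        by_cases h2 : b = a
        · rw [if_pos h2] at h
          rcases (PySem.Set.mem_add _ _ _).mp h with h3 | h3
          · exact hd a v' h3
          · exact h3 ▸ hbK
        · rw [if_neg h2] at h
          exact hd b v' h
      · exact h ▸ haK
    · rw [if_neg h1, PySem.Dict.getD_modify] at hv'
      by_cases h2 : u' = a
      · rw [if_pos h2] at hv'
        rcases (PySem.Set.mem_add _ _ _).mp hv' with h | h
        · exact hd a v' h
        · exact h ▸ hbK
      · rw [if_neg h2] at hv'
        exact hd u' v' hv'
theorem post_eq {K : List String} (hK : K.Nodup) (nodes : List String)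
    (hKof : PySem.Set.ofList nodes = K)
    (T : PySem.Dict String String)
    (hT : T.items = K.map (fun n => (n, classifyNode n)))
    (dB : PySem.Dict String Int)
    (hkeys : ∀ n k, dB.get? n = some k → n ∈ K)
    (hnonneg : ∀ n k, dB.get? n = some k → 0 ≤ k)
    (hzero : ∃ s ∈ K, dB.get? s = some 0) :
    postA nodes T (AofB K dB) = postB K T dB := by
  have hmemnodes : ∀ n ∈ nodes, n ∈ K := by
    intro n hn
    rw [← hKof]
    exact (PySem.Set.mem_ofList nodes n).mpr hn
  have hTkeys : T.keys = K := by
    show T.items.map (fun p => p.1) = K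
    rw [hT, List.map_map]
    simp [Function.comp_def]
  have hTgetD : ∀ n ∈ K, T.getD n "" = classifyNode n := by
    intro n hn
    have hmem : (n, classifyNode n) ∈ T.items := by
      rw [hT]; exact List.mem_map.mpr ⟨n, hn, rfl⟩
    have hnd : T.keys.Nodup := by rw [hTkeys]; exact hK
    exact PySem.Dict.getD_of_mem_items T hmem hnd ""
  simp only [postA, postB]
  have hvals : (AofB K dB).values = K.map (fun n => dB.get? n) := by
    show ((K.map (fun n => (n, dB.get? n))).map (fun p => p.2)) = _
    rw [List.map_map]
    rfl
  rw [hvals, List.filterMap_map]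
  rw [show List.filterMap ((fun o => o) ∘ fun n => dB.get? n) K
      = K.filterMap (fun n => dB.get? n) from rfl]
  obtain ⟨s0, hs0K, hs0⟩ := hzero
  have h0F : (0 : Int) ∈ K.filterMap (fun n => dB.get? n) :=
    List.mem_filterMap.mpr ⟨s0, hs0K, hs0⟩
  have hbase : pyMinD (K.filterMap (fun n => dB.get? n)) = 0 := by
    unfold pyMinD
    cases hmin : PySem.List.min? (K.filterMap (fun n => dB.get? n)) (fun x => x) with
    | none => rfl
    | some m =>
      have h1 : m ≤ 0 := PySem.List.min?_isMin hmin 0 h0F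
      have h2 : 0 ≤ m := by
        obtain ⟨n, _, hget⟩ := List.mem_filterMap.mp (PySem.List.min?_mem hmin)
        exact hnonneg n m hget
      show m = 0
      omega
  rw [hbase]
  have hA2 := passA_items dB hK nodes hmemnodes
  rw [hKof] at hA2
  have hB2 : (K.foldl (rawBodyB dB 0) PySem.Dict.empty).items
      = K.map (fun m => (m, (dB.get? m).getD 0)) := by
    refine (PySem.Dict.items_foldl_insert_fresh K (fun n => n)
      (fun n => match dB.get? n with | some k => k - 0 | none => 0) PySem.Dict.empty
      (fun a _ => PySem.Dict.contains_empty a) (by simpa using hK)).trans ?_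
    rw [show (PySem.Dict.empty : PySem.Dict String Int).items = [] from rfl, List.nil_append]
    apply List.map_congr_left
    intro n _
    cases h : dB.get? n <;> simp [h]
  have hd2 : (nodes.foldl (passBodyA (AofB K dB) 0) PySem.Dict.empty)
      = (K.foldl (rawBodyB dB 0) PySem.Dict.empty) :=
    PySem.Dict.ext (hA2.trans hB2.symm)
  rw [hd2]
  set R := K.foldl (rawBodyB dB 0) PySem.Dict.empty with hRdef
  have hRkeys : R.keys = K := by
    show R.items.map (fun p => p.1) = K
    rw [hB2, List.map_map]
    simp [Function.comp_def]
  have hRget : ∀ n ∈ K, R.get? n = some ((dB.get? n).getD 0) := by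
    intro n hn
    apply PySem.Dict.get?_of_mem_items
    · rw [hB2]; exact List.mem_map.mpr ⟨n, hn, rfl⟩
    · rw [hRkeys]; exact hK
  have hRgetD : ∀ n ∈ K, R.getD n 0 = (dB.get? n).getD 0 := by
    intro n hn
    rw [PySem.Dict.getD_eq_get?_getD, hRget n hn]
    rfl
  have hcontains : ∀ p ∈ T.items, R.contains p.1 = true := by
    intro p hp
    rw [PySem.Dict.contains_eq_decide_mem_keys, hRkeys]
    have hpk : p.1 ∈ T.keys := List.mem_map.mpr ⟨p, hp, rfl⟩
    rw [hTkeys] at hpk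
    simp [hpk]
  have hfstnd : (T.items.map Prod.fst).Nodup := by
    have h1 : T.items.map Prod.fst = T.keys := rfl
    rw [h1, hTkeys]
    exact hK
  have hWkeys : (T.items.foldl (fun (d2 : PySem.Dict String Int) p =>
      if p.2 == "workstation" then d2.insert p.1 (max (d2.getD p.1 0) (pyMaxD R.values)) else d2)
      R).keys = K := by
    rw [wsPass_keys (pyMaxD R.values) T.items R hcontains, hRkeys]
  have hW3 : (T.items.foldl (fun (d2 : PySem.Dict String Int) p =>
      if p.2 == "workstation" then d2.insert p.1 (max (d2.getD p.1 0) (pyMaxD R.values)) else d2)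
      R).items
      = K.map (fun n => (n, if classifyNode n == "workstation"
          then max ((dB.get? n).getD 0) (pyMaxD R.values) else (dB.get? n).getD 0)) := by
    rw [PySem.Dict.items_eq_map_keys _ (by rw [hWkeys]; exact hK) 0, hWkeys]
    apply List.map_congr_left
    intro n hn
    have hmemT : (n, classifyNode n) ∈ T.items := by
      rw [hT]; exact List.mem_map.mpr ⟨n, hn, rfl⟩
    have hws := wsPass_get?_mem (pyMaxD R.values) T.items R n (classifyNode n) hfstnd hmemT
    rw [PySem.Dict.getD_eq_get?_getD, hws]
    by_cases hc : (classifyNode n == "workstation") = true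
    · rw [if_pos hc, if_pos hc]
      simp [hRgetD n hn]
    · rw [if_neg hc, if_neg hc, hRget n hn]
      rfl
  have hBlvl : (K.foldl (fun (d : PySem.Dict String Int) n =>
      d.insert n (if T.getD n "" == "workstation"
        then max (R.getD n 0) (pyMaxD R.values) else R.getD n 0)) PySem.Dict.empty).items
      = K.map (fun n => (n, if classifyNode n == "workstation"
          then max ((dB.get? n).getD 0) (pyMaxD R.values) else (dB.get? n).getD 0)) := by
    refine (PySem.Dict.items_foldl_insert_fresh K (fun n => n)
      (fun n => if T.getD n "" == "workstation"
        then max (R.getD n 0) (pyMaxD R.values) else R.getD n 0) PySem.Dict.empty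
      (fun a _ => PySem.Dict.contains_empty a) (by simpa using hK)).trans ?_
    rw [show (PySem.Dict.empty : PySem.Dict String Int).items = [] from rfl, List.nil_append]
    apply List.map_congr_left
    intro n hn
    rw [hTgetD n hn, hRgetD n hn]
  have hlvl : (T.items.foldl (fun (d2 : PySem.Dict String Int) p =>
      if p.2 == "workstation" then d2.insert p.1 (max (d2.getD p.1 0) (pyMaxD R.values)) else d2) R)
      = (K.foldl (fun (d : PySem.Dict String Int) n =>
      d.insert n (if T.getD n "" == "workstation"
        then max (R.getD n 0) (pyMaxD R.values) else R.getD n 0)) PySem.Dict.empty) :=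
    PySem.Dict.ext (hW3.trans hBlvl.symm)
  rw [hlvl]
  set L := K.foldl (fun (d : PySem.Dict String Int) n =>
      d.insert n (if T.getD n "" == "workstation"
        then max (R.getD n 0) (pyMaxD R.values) else R.getD n 0)) PySem.Dict.empty with hLdef
  have hBlvl' : L.items = K.map (fun n => (n, if classifyNode n == "workstation"
      then max ((dB.get? n).getD 0) (pyMaxD R.values) else (dB.get? n).getD 0)) := hBlvl
  have hLkeys : L.keys = K := by
    show L.items.map (fun p => p.1) = K
    rw [hBlvl', List.map_map]
    simp [Function.comp_def]
  rw [hLkeys]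
  have hLcont : ∀ x ∈ K, L.contains x = true := by
    intro x hx
    rw [PySem.Dict.contains_eq_decide_mem_keys, hLkeys]
    simp [hx]
  have hAfin : (K.foldl (fun (d : PySem.Dict String Int) n =>
      d.insert n ((mkRank (PySem.List.sorted (PySem.Set.ofList L.values) (fun x => x) false)).getD
        (d.getD n 0) 0)) L).items
      = K.map (fun n => (n, (mkRank (PySem.List.sorted (PySem.Set.ofList L.values) (fun x => x)
          false)).getD (L.getD n 0) 0)) := by
    have hk2 : (K.foldl (fun (d : PySem.Dict String Int) n =>
        d.insert n ((mkRank (PySem.List.sorted (PySem.Set.ofList L.values) (fun x => x)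
          false)).getD (d.getD n 0) 0)) L).keys = K := by
      rw [remap_keys _ K L hLcont, hLkeys]
    rw [PySem.Dict.items_eq_map_keys _ (by rw [hk2]; exact hK) 0, hk2]
    apply List.map_congr_left
    intro n hn
    rw [PySem.Dict.getD_eq_get?_getD, remap_get?_mem _ K L n hK hn]
    rfl
  have hBfin : (K.foldl (fun (d : PySem.Dict String Int) n =>
      d.insert n ((mkRank (PySem.List.sorted (PySem.Set.ofList L.values) (fun x => x)
        false)).getD (L.getD n 0) 0)) PySem.Dict.empty).items
      = K.map (fun n => (n, (mkRank (PySem.List.sorted (PySem.Set.ofList L.values) (fun x => x)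
          false)).getD (L.getD n 0) 0)) := by
    refine (PySem.Dict.items_foldl_insert_fresh K (fun n => n)
      (fun n => (mkRank (PySem.List.sorted (PySem.Set.ofList L.values) (fun x => x)
        false)).getD (L.getD n 0) 0) PySem.Dict.empty
      (fun a _ => PySem.Dict.contains_empty a) (by simpa using hK)).trans ?_
    rw [show (PySem.Dict.empty : PySem.Dict String Int).items = [] from rfl, List.nil_append]
  exact hAfin.trans hBfin.symm
theorem bfsB_mono {adj : PySem.Dict String (PySem.Set String)} :
    ∀ (fuel : Nat) (dB : PySem.Dict String Int) (fr : List String) (d : Int) (n : String) (k : Int),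
      dB.get? n = some k → (bfsB adj fuel dB fr d).get? n = some k := by
  intro fuel
  induction fuel with
  | zero => intro dB fr d n k h; exact h
  | succ fb ih =>
    intro dB fr d n k h
    cases fr with
    | nil => exact h
    | cons u f =>
      rw [show bfsB adj (fb + 1) dB (u :: f) d
          = bfsB adj fb ((u :: f).foldl (stepB adj d) (dB, ([] : List String))).1
              ((u :: f).foldl (stepB adj d) (dB, ([] : List String))).2 (d + 1) from rfl]
      exact ih _ _ _ n k (rowMono _ _ n k h)

theorem bfsB_nonneg {adj : PySem.Dict String (PySem.Set String)} :
    ∀ (fuel : Nat) (dB : PySem.Dict String Int) (fr : List String) (d : Int),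
      0 ≤ d → (∀ n k, dB.get? n = some k → 0 ≤ k) →
      ∀ n k, (bfsB adj fuel dB fr d).get? n = some k → 0 ≤ k := by
  intro fuel
  induction fuel with
  | zero => intro dB fr d _ hv n k h; exact hv n k h
  | succ fb ih =>
    intro dB fr d hd hv n k h
    cases fr with
    | nil => exact hv n k h
    | cons u f =>
      rw [show bfsB adj (fb + 1) dB (u :: f) d
          = bfsB adj fb ((u :: f).foldl (stepB adj d) (dB, ([] : List String))).1
              ((u :: f).foldl (stepB adj d) (dB, ([] : List String))).2 (d + 1) from rfl] at h
      refine ih _ _ (d + 1) (by omega) ?_ n k h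
      intro m j hm
      rcases rowVals _ _ m j hm with h' | h'
      · exact hv m j h'
      · omega

theorem bfsB_keys {K : List String} {adj : PySem.Dict String (PySem.Set String)}
    (hadjK : ∀ u v, v ∈ adj.getD u PySem.Set.empty → v ∈ K) :
    ∀ (fuel : Nat) (dB : PySem.Dict String Int) (fr : List String) (d : Int),
      (∀ m j, dB.get? m = some j → m ∈ K) →
      ∀ n k, (bfsB adj fuel dB fr d).get? n = some k → n ∈ K := by
  intro fuel
  induction fuel with
  | zero => intro dB fr d h n k hg; exact h n k hg
  | succ fb ih =>
    intro dB fr d h n k hg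
    cases fr with
    | nil => exact h n k hg
    | cons u f =>
      rw [show bfsB adj (fb + 1) dB (u :: f) d
          = bfsB adj fb ((u :: f).foldl (stepB adj d) (dB, ([] : List String))).1
              ((u :: f).foldl (stepB adj d) (dB, ([] : List String))).2 (d + 1) from rfl] at hg
      refine ih _ _ _ ?_ n k hg
      intro m j hm
      rcases rowKeys _ _ m j hm with h' | ⟨u', _, hu'⟩
      · exact h m j h'
      · exact hadjK u' m hu'

-- every node inserted during a row is appended to the out-list
theorem foldB_newMem {d : Int} : ∀ (ns : List String) (p : PySem.Dict String Int × List String)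
    (n : String) (k : Int), ((ns.foldl (nbrB d) p).1).get? n = some k →
      p.1.get? n = some k ∨ n ∈ ((ns.foldl (nbrB d) p).2) := by
  intro ns
  induction ns with
  | nil => intro p n k h; exact Or.inl h
  | cons v ns ih =>
    intro p n k h
    have h2mono : ∀ (ms : List String) (q : PySem.Dict String Int × List String) (x : String),
        x ∈ q.2 → x ∈ (ms.foldl (nbrB d) q).2 := by
      intro ms
      induction ms with
      | nil => intro q x hx; exact hx
      | cons w ms ih2 =>
        intro q x hx
        rw [List.foldl_cons]
        apply ih2
        unfold nbrB
        split
        · exact hx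
        · exact List.mem_append.mpr (Or.inl hx)
    rw [List.foldl_cons] at h ⊢
    by_cases hc : p.1.contains v = true
    · have hv : nbrB d p v = p := by simp [nbrB, hc]
      rw [hv] at h ⊢
      exact ih _ n k h
    · have hc' : p.1.contains v = false := by rwa [Bool.not_eq_true] at hc
      have hv : nbrB d p v = (p.1.insert v (d + 1), p.2 ++ [v]) := by simp [nbrB, hc']
      rw [hv] at h ⊢
      rcases ih _ n k h with h' | h'
      · by_cases e : n = v
        · subst e
          exact Or.inr (h2mono ns _ n (by simp))
        · rw [show ((p.1.insert v (d + 1), p.2 ++ [v]).1) = p.1.insert v (d + 1) from rfl,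
            PySem.Dict.get?_insert_of_ne _ _ e] at h'
          exact Or.inl h'
      · exact Or.inr h'

theorem rowNewMem {adj : PySem.Dict String (PySem.Set String)} {d : Int} :
    ∀ (f : List String) (p : PySem.Dict String Int × List String) (n : String) (k : Int),
      ((f.foldl (stepB adj d) p).1).get? n = some k →
        p.1.get? n = some k ∨ n ∈ (f.foldl (stepB adj d) p).2 := by
  intro f
  induction f with
  | nil => intro p n k h; exact Or.inl h
  | cons u f ih =>
    intro p n k h
    have h2mono : ∀ (g : List String) (q : PySem.Dict String Int × List String) (x : String),
        x ∈ q.2 → x ∈ (g.foldl (stepB adj d) q).2 := by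
      intro g
      induction g with
      | nil => intro q x hx; exact hx
      | cons w g ih2 =>
        intro q x hx
        rw [List.foldl_cons]
        apply ih2
        show x ∈ ((adj.getD w PySem.Set.empty).foldl (nbrB d) q).2
        have : ∀ (ms : List String) (q' : PySem.Dict String Int × List String),
            x ∈ q'.2 → x ∈ (ms.foldl (nbrB d) q').2 := by
          intro ms
          induction ms with
          | nil => intro q' hx'; exact hx'
          | cons y ms ih3 =>
            intro q' hx'
            rw [List.foldl_cons]
            apply ih3
            unfold nbrB
            split
            · exact hx'
            · exact List.mem_append.mpr (Or.inl hx')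
        exact this _ _ hx
    rw [List.foldl_cons] at h ⊢
    rcases ih _ n k h with h' | h'
    · rcases foldB_newMem _ _ n k h' with h'' | h''
      · exact Or.inl h''
      · exact Or.inr (h2mono f _ n h'')
    · exact Or.inr h'

-- every neighbour of a processed frontier node ends up visited
theorem foldB_cover {d : Int} : ∀ (ns : List String) (p : PySem.Dict String Int × List String)
    (m : String), m ∈ ns → ∃ w, ((ns.foldl (nbrB d) p).1).get? m = some w := by
  intro ns
  induction ns with
  | nil => intro p m h; cases h
  | cons v ns ih =>
    intro p m hm
    rw [List.foldl_cons]
    rcases List.mem_cons.mp hm with h | h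
    · subst h
      by_cases hc : p.1.contains m = true
      · have hv : nbrB d p m = p := by simp [nbrB, hc]
        rw [hv]
        cases hg : p.1.get? m with
        | none => exact absurd ((PySem.Dict.get?_eq_none_iff_contains _ _).mp hg) (by simp [hc])
        | some w => exact ⟨w, foldB_mono _ _ _ _ hg⟩
      · have hc' : p.1.contains m = false := by rwa [Bool.not_eq_true] at hc
        have hv : nbrB d p m = (p.1.insert m (d + 1), p.2 ++ [m]) := by simp [nbrB, hc']
        rw [hv]
        exact ⟨d + 1, foldB_mono _ _ _ _ (PySem.Dict.get?_insert_self _ _ _)⟩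
    · exact ih _ m h

theorem rowCover {adj : PySem.Dict String (PySem.Set String)} {d : Int} :
    ∀ (f : List String) (p : PySem.Dict String Int × List String) (u : String), u ∈ f →
      ∀ m, m ∈ adj.getD u PySem.Set.empty →
      ∃ w, ((f.foldl (stepB adj d) p).1).get? m = some w := by
  intro f
  induction f with
  | nil => intro p u h; cases h
  | cons u0 f ih =>
    intro p u hu m hm
    rw [List.foldl_cons]
    rcases List.mem_cons.mp hu with h | h
    · subst h
      obtain ⟨w, hw⟩ := foldB_cover (adj.getD u PySem.Set.empty) p m hm
      exact ⟨w, rowMono _ _ m w hw⟩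
    · exact ih _ u h m hm

-- ----- B's Bellman-Ford round vs one level-BFS round -----

-- symmetry of the adjacency dict built by the shared edge loop
def AdjSym (adj : PySem.Dict String (PySem.Set String)) : Prop :=
  ∀ u v, v ∈ adj.getD u PySem.Set.empty → u ∈ adj.getD v PySem.Set.empty

theorem edgeAdd_mem (adj : PySem.Dict String (PySem.Set String)) (e : List (String × String))
    (a b : String) (ha : (PySem.Dict.ofList e).get? "a" = some a)
    (hb : (PySem.Dict.ofList e).get? "b" = some b) (u v : String) :
    (v ∈ (edgeAdd adj e).getD u PySem.Set.empty) ↔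
      (v ∈ adj.getD u PySem.Set.empty ∨ (u = a ∧ v = b) ∨ (u = b ∧ v = a)) := by
  unfold edgeAdd
  simp only [ha, hb]
  rw [PySem.Dict.getD_modify]
  by_cases h1 : u = b
  · rw [if_pos h1, PySem.Set.mem_add, PySem.Dict.getD_modify]
    by_cases h2 : b = a
    · rw [if_pos h2, PySem.Set.mem_add]
      subst h1; subst h2
      constructor
      · rintro ((h | h) | h)
        · exact Or.inl h
        · exact Or.inr (Or.inl ⟨rfl, h⟩)
        · exact Or.inr (Or.inr ⟨rfl, h⟩)
      · rintro (h | ⟨_, h⟩ | ⟨_, h⟩)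
        · exact Or.inl (Or.inl h)
        · exact Or.inl (Or.inr h)
        · exact Or.inr h
    · rw [if_neg h2]
      subst h1
      constructor
      · rintro (h | h)
        · exact Or.inl h
        · exact Or.inr (Or.inr ⟨rfl, h⟩)
      · rintro (h | ⟨h, _⟩ | ⟨_, h⟩)
        · exact Or.inl h
        · exact absurd h h2
        · exact Or.inr h
  · rw [if_neg h1, PySem.Dict.getD_modify]
    by_cases h2 : u = a
    · rw [if_pos h2, PySem.Set.mem_add]
      subst h2
      constructor
      · rintro (h | h)
        · exact Or.inl h
        · exact Or.inr (Or.inl ⟨rfl, h⟩)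
      · rintro (h | ⟨_, h⟩ | ⟨h, _⟩)
        · exact Or.inl h
        · exact Or.inr h
        · exact absurd h h1
    · rw [if_neg h2]
      constructor
      · intro h
        exact Or.inl h
      · rintro (h | ⟨h, _⟩ | ⟨h, _⟩)
        · exact h
        · exact absurd h h2
        · exact absurd h h1

theorem buildAdj_sym (K : List String) (edges : List (List (String × String))) :
    AdjSym (buildAdj K edges) := by
  unfold buildAdj
  suffices h : ∀ (es : List (List (String × String))) (d : PySem.Dict String (PySem.Set String)),
      AdjSym d → AdjSym (es.foldl edgeAdd d) by
    apply h
    intro u v hv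
    rw [baseAdj_getD] at hv
    cases hv
  intro es
  induction es with
  | nil => intro d hd; exact hd
  | cons e es ih =>
    intro d hd
    rw [List.foldl_cons]
    apply ih
    intro u v hv
    cases hga : (PySem.Dict.ofList e).get? "a" with
    | none =>
      have he : edgeAdd d e = d := by unfold edgeAdd; rw [hga]
      rw [he] at hv ⊢
      exact hd u v hv
    | some a =>
      cases hgb : (PySem.Dict.ofList e).get? "b" with
      | none =>
        have he : edgeAdd d e = d := by
          unfold edgeAdd; rw [hga, hgb]
        rw [he] at hv ⊢
        exact hd u v hv
      | some b =>
        rw [edgeAdd_mem d e a b hga hgb] at hv ⊢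
        rcases hv with h | ⟨h1, h2⟩ | ⟨h1, h2⟩
        · exact Or.inl (hd u v h)
        · exact Or.inr (Or.inr ⟨h2, h1⟩)
        · exact Or.inr (Or.inl ⟨h2, h1⟩)

-- conditional-insert build over distinct keys: get? characterisation
theorem condBuild_get? (adj : PySem.Dict String (PySem.Set String))
    (dist : PySem.Dict String Int) :
    ∀ (l : List String) (acc : PySem.Dict String Int), l.Nodup →
      (∀ x ∈ l, acc.get? x = none) → ∀ n,
      (l.foldl (fun (new : PySem.Dict String Int) n =>
          match PySem.List.min? (bfCands adj dist n) (fun x => x) with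
          | some v => new.insert n v
          | none => new) acc).get? n
        = if n ∈ l then PySem.List.min? (bfCands adj dist n) (fun x => x) else acc.get? n := by
  intro l
  induction l with
  | nil => intro acc _ _ n; simp
  | cons x l ih =>
    intro acc hnd hacc n
    rw [List.foldl_cons]
    have hstep : ∀ y, y ≠ x →
        ((match PySem.List.min? (bfCands adj dist x) (fun t => t) with
          | some v => acc.insert x v
          | none => acc) : PySem.Dict String Int).get? y = acc.get? y := by
      intro y hy
      cases hmin : PySem.List.min? (bfCands adj dist x) (fun t => t) with
      | some v => simp only [hmin]; rw [PySem.Dict.get?_insert_of_ne _ _ hy]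
      | none => simp only [hmin]
    rw [ih _ (List.nodup_cons.mp hnd).2 ?hrest n]
    case hrest =>
      intro y hy
      rw [hstep y (fun e => (List.nodup_cons.mp hnd).1 (e ▸ hy))]
      exact hacc y (by simp [hy])
    by_cases hn : n ∈ l
    · rw [if_pos hn, if_pos (by simp [hn])]
    · rw [if_neg hn]
      by_cases he : n = x
      · subst he
        rw [if_pos (by simp)]
        cases hmin : PySem.List.min? (bfCands adj dist n) (fun t => t) with
        | some v => simp only [hmin]; rw [PySem.Dict.get?_insert_self]
        | none => simp only [hmin]; rw [hacc n (by simp)]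
      · rw [if_neg (by simp [hn, he]), hstep n he]

theorem bfRound_get? {K : List String} (hK : K.Nodup)
    (adj : PySem.Dict String (PySem.Set String)) (dist : PySem.Dict String Int) (n : String) :
    (bfRound adj K dist).get? n
      = if n ∈ K then PySem.List.min? (bfCands adj dist n) (fun x => x) else none := by
  unfold bfRound
  rw [condBuild_get? adj dist K PySem.Dict.empty hK (fun x _ => PySem.Dict.get?_empty x) n]
  by_cases hn : n ∈ K
  · rw [if_pos hn, if_pos hn]
  · rw [if_neg hn, if_neg hn, PySem.Dict.get?_empty]

-- the level-BFS invariant after each round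
def LInv (K : List String) (adj : PySem.Dict String (PySem.Set String)) (d : Int)
    (dist : PySem.Dict String Int) (frontier : List String) : Prop :=
  0 ≤ d ∧
  (∀ n k, dist.get? n = some k → n ∈ K) ∧
  (∀ n k, dist.get? n = some k → 0 ≤ k ∧ k ≤ d) ∧
  (∀ n, dist.get? n = some d ↔ n ∈ frontier) ∧
  (∀ n v, dist.get? n = some v → v < d → ∀ m, m ∈ adj.getD n PySem.Set.empty →
    ∃ w, dist.get? m = some w ∧ w ≤ v + 1)

theorem min?_head_of_le {v : Int} {t : List Int} (h : ∀ x ∈ t, v ≤ x) :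
    PySem.List.min? (v :: t) (fun x => x) = some v := by
  cases hmin : PySem.List.min? (v :: t) (fun x => x) with
  | none =>
    rw [PySem.List.min?_eq_none_iff] at hmin
    cases hmin
  | some m =>
    have h1 : m ≤ v := PySem.List.min?_isMin hmin v (by simp)
    have h2 : v ≤ m := by
      rcases List.mem_cons.mp (PySem.List.min?_mem hmin) with h' | h'
      · omega
      · exact h m h'
    have : m = v := by omega
    rw [this]

-- the heart: one Bellman-Ford round agrees pointwise with one level-BFS round
theorem roundAgree {K : List String} (hK : K.Nodup)
    {adj : PySem.Dict String (PySem.Set String)}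
    (hadjK : ∀ u v, v ∈ adj.getD u PySem.Set.empty → v ∈ K)
    (hsym : AdjSym adj) {d : Int} {dist : PySem.Dict String Int} {frontier : List String}
    (hInv : LInv K adj d dist frontier) :
    ∀ n, (bfRound adj K dist).get? n
      = ((frontier.foldl (stepB adj d) (dist, ([] : List String))).1).get? n := by
  obtain ⟨hd0, hkeys, hbnd, hfr, hcomp⟩ := hInv
  intro n
  rw [bfRound_get? hK adj dist n]
  by_cases hnK : n ∈ K
  · rw [if_pos hnK]
    cases hg : dist.get? n with
    | some v =>
      -- cands = v :: neighbours, every neighbour term ≥ v, so min = v; LS keeps v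
      have hct : dist.contains n = true := by
        cases hc : dist.contains n
        · exact absurd ((PySem.Dict.get?_eq_none_iff_contains _ _).mpr hc) (by simp [hg])
        · rfl
      have hgD : dist.getD n 0 = v := by
        rw [PySem.Dict.getD_eq_get?_getD, hg]; rfl
      have hcands : bfCands adj dist n
          = v :: ((adj.getD n PySem.Set.empty).filter (fun m => dist.contains m)).map
              (fun m => dist.getD m 0 + 1) := by
        unfold bfCands
        rw [if_pos hct, hgD]
        rfl
      have hge : ∀ x ∈ ((adj.getD n PySem.Set.empty).filter (fun m => dist.contains m)).map
          (fun m => dist.getD m 0 + 1), v ≤ x := by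
        intro x hx
        obtain ⟨m, hmf, hmx⟩ := List.mem_map.mp hx
        have hmadj : m ∈ adj.getD n PySem.Set.empty := List.mem_of_mem_filter hmf
        have hmc : dist.contains m = true := by
          have := List.of_mem_filter hmf
          simpa using this
        obtain ⟨w, hw⟩ : ∃ w, dist.get? m = some w := by
          cases hgm : dist.get? m with
          | none => exact absurd ((PySem.Dict.get?_eq_none_iff_contains _ _).mp hgm) (by simp [hmc])
          | some w => exact ⟨w, rfl⟩
        have hwD : dist.getD m 0 = w := by rw [PySem.Dict.getD_eq_get?_getD, hw]; rfl
        rw [← hmx, hwD]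
        have hnm : n ∈ adj.getD m PySem.Set.empty := hsym n m hmadj
        have hwle : w ≤ d := (hbnd m w hw).2
        by_cases hwd : w < d
        · obtain ⟨v', hv', hv'le⟩ := hcomp m w hw hwd n hnm
          rw [hg] at hv'
          injection hv' with hv''
          omega
        · have : w = d := by omega
          have hvd : v ≤ d := (hbnd n v hg).2
          omega
      rw [hcands, min?_head_of_le hge]
      exact (rowMono frontier (dist, []) n v hg).symm
    | none =>
      -- every candidate comes from a frontier neighbour; both sides agree on (non-)insertion
      have hct : dist.contains n = false := (PySem.Dict.get?_eq_none_iff_contains _ _).mp hg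
      have hcands : bfCands adj dist n
          = ((adj.getD n PySem.Set.empty).filter (fun m => dist.contains m)).map
              (fun m => dist.getD m 0 + 1) := by
        unfold bfCands
        rw [if_neg (by simp [hct])]
        rfl
      have hfrontierval : ∀ m ∈ (adj.getD n PySem.Set.empty).filter (fun m => dist.contains m),
          dist.get? m = some d := by
        intro m hmf
        have hmadj : m ∈ adj.getD n PySem.Set.empty := List.mem_of_mem_filter hmf
        have hmc : dist.contains m = true := by
          have := List.of_mem_filter hmf
          simpa using this
        obtain ⟨w, hw⟩ : ∃ w, dist.get? m = some w := by
          cases hgm : dist.get? m with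
          | none => exact absurd ((PySem.Dict.get?_eq_none_iff_contains _ _).mp hgm) (by simp [hmc])
          | some w => exact ⟨w, rfl⟩
        have hwle : w ≤ d := (hbnd m w hw).2
        by_cases hwd : w < d
        · obtain ⟨v', hv', _⟩ := hcomp m w hw hwd n (hsym n m hmadj)
          rw [hg] at hv'
          cases hv'
        · have : w = d := by omega
          rw [hw, this]
      cases hfl : (adj.getD n PySem.Set.empty).filter (fun m => dist.contains m) with
      | nil =>
        -- no visited neighbour: BF leaves n out, LS inserts nothing either
        rw [hcands, hfl]
        show (none : Option Int) = _
        cases hres : ((frontier.foldl (stepB adj d) (dist, ([] : List String))).1).get? n with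
        | none => rfl
        | some k =>
          exfalso
          rcases rowKeys frontier (dist, []) n k hres with h' | ⟨u, hu, hnadj⟩
          · rw [hg] at h'; cases h'
          · -- u is a frontier node adjacent to n, so u is a visited neighbour of n
            have humem : u ∈ adj.getD n PySem.Set.empty := hsym u n hnadj
            have huget : dist.get? u = some d := (hfr u).mpr hu
            have huc : dist.contains u = true := by
              cases hc : dist.contains u
              · exact absurd ((PySem.Dict.get?_eq_none_iff_contains _ _).mpr hc)
                  (by simp [huget])
              · rfl
            have : u ∈ (adj.getD n PySem.Set.empty).filter (fun m => dist.contains m) :=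
              List.mem_filter.mpr ⟨humem, by simp [huc]⟩
            rw [hfl] at this
            cases this
      | cons m0 t0 =>
        -- some visited neighbour: it is in the frontier, BF gives d+1, LS inserts d+1
        have hall : ∀ x ∈ bfCands adj dist n, x = d + 1 := by
          intro x hx
          rw [hcands] at hx
          obtain ⟨m, hmf, hmx⟩ := List.mem_map.mp hx
          have := hfrontierval m hmf
          have hwD : dist.getD m 0 = d := by rw [PySem.Dict.getD_eq_get?_getD, this]; rfl
          rw [← hmx, hwD]
        have hne : bfCands adj dist n ≠ [] := by
          rw [hcands, hfl]; simp
        have hmin : PySem.List.min? (bfCands adj dist n) (fun x => x) = some (d + 1) := by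
          cases hmin : PySem.List.min? (bfCands adj dist n) (fun x => x) with
          | none =>
            rw [PySem.List.min?_eq_none_iff] at hmin
            exact absurd hmin hne
          | some m => rw [hall m (PySem.List.min?_mem hmin)]
        rw [hmin]
        -- LS: n is a neighbour of the frontier node m0, so it gets inserted
        have hm0 : dist.get? m0 = some d := hfrontierval m0 (by rw [hfl]; simp)
        have hm0fr : m0 ∈ frontier := (hfr m0).mp hm0
        have hm0adj : m0 ∈ adj.getD n PySem.Set.empty :=
          List.mem_of_mem_filter (by rw [hfl]; simp : m0 ∈ (adj.getD n
            PySem.Set.empty).filter (fun m => dist.contains m))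
        obtain ⟨w, hw⟩ := rowCover frontier (dist, ([] : List String)) m0 hm0fr n
          (hsym n m0 hm0adj)
        rcases rowVals frontier (dist, []) n w hw with h' | h'
        · rw [hg] at h'; cases h'
        · rw [hw, h']
  · rw [if_neg hnK]
    cases hres : ((frontier.foldl (stepB adj d) (dist, ([] : List String))).1).get? n with
    | none => rfl
    | some k =>
      exfalso
      rcases rowKeys frontier (dist, []) n k hres with h' | ⟨u, _, hnadj⟩
      · exact hnK (hkeys n k h')
      · exact hnK (hadjK u n hnadj)

-- the invariant is preserved by one level-BFS round
theorem roundInv {K : List String} (hK : K.Nodup)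
    {adj : PySem.Dict String (PySem.Set String)}
    (hadjK : ∀ u v, v ∈ adj.getD u PySem.Set.empty → v ∈ K)
    {d : Int} {dist : PySem.Dict String Int} {frontier : List String}
    (hInv : LInv K adj d dist frontier) :
    LInv K adj (d + 1) ((frontier.foldl (stepB adj d) (dist, ([] : List String))).1)
      ((frontier.foldl (stepB adj d) (dist, ([] : List String))).2) := by
  obtain ⟨hd0, hkeys, hbnd, hfr, hcomp⟩ := hInv
  obtain ⟨c1, c2, c3, _⟩ := rowFacts hK hadjK frontier dist []
    (fun u hu => (hfr u).mpr hu) (by simp)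
    (fun n k h => by have := (hbnd n k h).2; omega) hkeys
  refine ⟨by omega, c2, ?_, ?_, ?_⟩
  · intro n k h
    rcases rowVals frontier (dist, []) n k h with h' | h'
    · have := hbnd n k h'
      exact ⟨this.1, by omega⟩
    · exact ⟨by omega, by omega⟩
  · intro n
    constructor
    · intro h
      rcases rowNewMem frontier (dist, []) n (d + 1) h with h' | h'
      · have := (hbnd n (d + 1) h').2
        omega
      · exact h'
    · intro h
      exact c3 n h
  · intro n v hv hvlt m hm
    rcases rowVals frontier (dist, []) n v hv with h' | h'
    · by_cases hvd : v < d
      · obtain ⟨w, hw, hwle⟩ := hcomp n v h' hvd m hm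
        exact ⟨w, rowMono frontier (dist, []) m w hw, hwle⟩
      · have hveq : v = d := by have := (hbnd n v h').2; omega
        have hnfr : n ∈ frontier := (hfr n).mp (hveq ▸ h')
        obtain ⟨w, hw⟩ := rowCover frontier (dist, ([] : List String)) n hnfr m hm
        refine ⟨w, hw, ?_⟩
        have := c1 m w hw
        omega
    · omega

-- Bellman-Ford rounds and bfCands depend on the dict only through get?
theorem bfCands_congr (adj : PySem.Dict String (PySem.Set String))
    {d1 d2 : PySem.Dict String Int} (h : ∀ n, d1.get? n = d2.get? n) (n : String) :
    bfCands adj d1 n = bfCands adj d2 n := by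
  have hc : ∀ m, d1.contains m = d2.contains m := by
    intro m
    cases h1 : d1.contains m <;> cases h2 : d2.contains m
    · rfl
    · have := (PySem.Dict.get?_eq_none_iff_contains d1 m).mpr h1
      rw [h m] at this
      rw [(PySem.Dict.get?_eq_none_iff_contains d2 m).mp this] at h2
      cases h2
    · have := (PySem.Dict.get?_eq_none_iff_contains d2 m).mpr h2
      rw [← h m] at this
      rw [(PySem.Dict.get?_eq_none_iff_contains d1 m).mp this] at h1
      cases h1
    · rfl
  have hg : ∀ m, d1.getD m 0 = d2.getD m 0 := by
    intro m
    rw [PySem.Dict.getD_eq_get?_getD, PySem.Dict.getD_eq_get?_getD, h m]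
  unfold bfCands
  rw [hc n, hg n]
  congr 1
  rw [show (fun m => d1.contains m) = (fun m => d2.contains m) from funext hc]
  exact List.map_congr_left (fun m _ => by rw [hg m])

theorem bfRound_congr (adj : PySem.Dict String (PySem.Set String)) (K : List String)
    {d1 d2 : PySem.Dict String Int} (h : ∀ n, d1.get? n = d2.get? n) :
    bfRound adj K d1 = bfRound adj K d2 := by
  unfold bfRound
  have : ∀ n, PySem.List.min? (bfCands adj d1 n) (fun x => x)
      = PySem.List.min? (bfCands adj d2 n) (fun x => x) := by
    intro n
    rw [bfCands_congr adj h n]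
  apply PySem.List.foldl_congr_mem
  intro acc n _
  rw [this n]

-- a stalled state (empty frontier) is a fixpoint of the Bellman-Ford round, pointwise
theorem stallRounds {K : List String} (hK : K.Nodup)
    {adj : PySem.Dict String (PySem.Set String)}
    (hadjK : ∀ u v, v ∈ adj.getD u PySem.Set.empty → v ∈ K)
    (hsym : AdjSym adj) {d : Int} {dist : PySem.Dict String Int}
    (hInv : LInv K adj d dist []) :
    ∀ (r : Nat) (dBF : PySem.Dict String Int), (∀ n, dBF.get? n = dist.get? n) →
      ∀ n, (bfRounds adj K r dBF).get? n = dist.get? n := by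
  intro r
  induction r with
  | zero => intro dBF h n; exact h n
  | succ r ih =>
    intro dBF h n
    show (bfRounds adj K r (bfRound adj K dBF)).get? n = dist.get? n
    have hstall : ∀ m, (bfRound adj K dist).get? m = dist.get? m := by
      intro m
      have := roundAgree hK hadjK hsym hInv m
      rwa [show (([] : List String).foldl (stepB adj d) (dist, ([] : List String))).1
        = dist from rfl] at this
    have hnext : LInv K adj (d + 1) dist [] := by
      have := roundInv hK hadjK hInv
      rwa [show (([] : List String).foldl (stepB adj d) (dist, ([] : List String))).1
        = dist from rfl, show (([] : List String).foldl (stepB adj d)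
          (dist, ([] : List String))).2 = [] from rfl] at this
    refine ih (bfRound adj K dBF) ?_ n
    intro m
    rw [bfRound_congr adj K h, hstall m]

-- main simulation: r Bellman-Ford rounds agree pointwise with the full level-BFS run
theorem bfSim {K : List String} (hK : K.Nodup)
    {adj : PySem.Dict String (PySem.Set String)}
    (hadjK : ∀ u v, v ∈ adj.getD u PySem.Set.empty → v ∈ K)
    (hsym : AdjSym adj) :
    ∀ (r : Nat) (d : Int) (dist : PySem.Dict String Int) (frontier : List String)
      (fuel : Nat) (dBF : PySem.Dict String Int),
      LInv K adj d dist frontier → Ucnt K dist ≤ r → Ucnt K dist + 2 ≤ fuel →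
      (∀ n, dBF.get? n = dist.get? n) →
      ∀ n, (bfRounds adj K r dBF).get? n = (bfsB adj fuel dist frontier d).get? n := by
  intro r
  induction r with
  | zero =>
    intro d dist frontier fuel dBF hInv hU hfuel h n
    -- Ucnt = 0: everything in K is visited, the level BFS can change nothing
    have hU0 : Ucnt K dist = 0 := by omega
    have hvis : ∀ m ∈ K, dist.contains m = true := by
      intro m hm
      cases hc : dist.contains m
      · exfalso
        have hnone : dist.get? m = none := (PySem.Dict.get?_eq_none_iff_contains _ _).mpr hc
        have : 0 < Ucnt K dist := by
          unfold Ucnt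
          refine List.countP_pos_iff.mpr ⟨m, hm, ?_⟩
          rw [hnone]; rfl
        omega
      · rfl
    have hnoopIn : ∀ (ns : List String) (nxt : List String), (∀ v ∈ ns, v ∈ K) →
        ns.foldl (nbrB d) (dist, nxt) = (dist, nxt) := by
      intro ns
      induction ns with
      | nil => intro _ _; rfl
      | cons v ns ihn =>
        intro nxt hvs
        rw [List.foldl_cons]
        have hv : nbrB d (dist, nxt) v = (dist, nxt) := by
          have := hvis v (hvs v (by simp))
          simp [nbrB, this]
        rw [hv]
        exact ihn nxt (fun w hw => hvs w (by simp [hw]))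
    have hnoop : ∀ (f : List String) (nxt : List String),
        f.foldl (stepB adj d) (dist, nxt) = (dist, nxt) := by
      intro f
      induction f with
      | nil => intro _; rfl
      | cons u f ihf =>
        intro nxt
        rw [List.foldl_cons]
        have hstep : stepB adj d (dist, nxt) u = (dist, nxt) := by
          show (adj.getD u PySem.Set.empty).foldl (nbrB d) (dist, nxt) = (dist, nxt)
          exact hnoopIn _ nxt (fun v hv => hadjK u v hv)
        rw [hstep, ihf]
    show dBF.get? n = _
    rw [h n]
    cases frontier with
    | nil =>
      obtain ⟨m, hm⟩ : ∃ m, fuel = m + 1 := ⟨fuel - 1, by omega⟩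
      rw [hm]
      rfl
    | cons u f =>
      obtain ⟨m, hm⟩ : ∃ m, fuel = m + 2 := ⟨fuel - 2, by omega⟩
      rw [hm]
      show dist.get? n = (bfsB adj (m + 1)
        ((u :: f).foldl (stepB adj d) (dist, ([] : List String))).1
        ((u :: f).foldl (stepB adj d) (dist, ([] : List String))).2 (d + 1)).get? n
      rw [hnoop]
      rfl
  | succ r ih =>
    intro d dist frontier fuel dBF hInv hU hfuel h n
    cases frontier with
    | nil =>
      -- LS is finished; BF rounds stall
      have hres : ∀ m, (bfsB adj fuel dist [] d).get? m = dist.get? m := by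
        intro m
        obtain ⟨f0, hf0⟩ : ∃ f0, fuel = f0 + 1 := ⟨fuel - 1, by omega⟩
        rw [hf0]
        rfl
      rw [hres n]
      exact stallRounds hK hadjK hsym hInv (r + 1) dBF h n
    | cons u f =>
      obtain ⟨f0, hf0⟩ : ∃ f0, fuel = f0 + 1 := ⟨fuel - 1, by omega⟩
      rw [hf0]
      show (bfRounds adj K r (bfRound adj K dBF)).get? n
        = (bfsB adj f0 ((u :: f).foldl (stepB adj d) (dist, ([] : List String))).1
            ((u :: f).foldl (stepB adj d) (dist, ([] : List String))).2 (d + 1)).get? n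
      set dist' := ((u :: f).foldl (stepB adj d) (dist, ([] : List String))).1 with hd'
      set nxt := ((u :: f).foldl (stepB adj d) (dist, ([] : List String))).2 with hn'
      have hInv' : LInv K adj (d + 1) dist' nxt := roundInv hK hadjK hInv
      have hpt : ∀ m, (bfRound adj K dBF).get? m = dist'.get? m := by
        intro m
        rw [bfRound_congr adj K h]
        exact roundAgree hK hadjK hsym hInv m
      obtain ⟨_, hkeys, hbnd, hfr, _⟩ := hInv
      obtain ⟨_, _, _, c4⟩ := rowFacts hK hadjK (u :: f) dist []
        (fun u' hu' => (hfr u').mpr hu') (by simp)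
        (fun n' k h' => by have := (hbnd n' k h').2; omega) hkeys
      rw [← hd', ← hn'] at c4
      cases hnx : nxt with
      | nil =>
        -- nothing newly visited: LS finishes next round; BF stalls for the rest
        have hres : ∀ m, (bfsB adj f0 dist' [] (d + 1)).get? m = dist'.get? m := by
          intro m
          obtain ⟨f1, hf1⟩ : ∃ f1, f0 = f1 + 1 := ⟨f0 - 1, by omega⟩
          rw [hf1]
          rfl
        rw [hres n]
        rw [hnx] at hInv'
        exact stallRounds hK hadjK hsym hInv' r (bfRound adj K dBF) hpt n
      | cons y t =>
        rw [← hnx]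
        refine ih (d + 1) dist' nxt f0 (bfRound adj K dBF) hInv' ?_ ?_ hpt n
        · rw [hnx] at c4
          simp only [List.length_cons, List.length_nil] at c4
          omega
        · rw [hnx] at c4
          simp only [List.length_cons, List.length_nil] at c4
          omega

-- post-processing depends on the final dict only through get?
theorem postB_congr (K : List String) (T : PySem.Dict String String)
    {d1 d2 : PySem.Dict String Int} (h : ∀ n, d1.get? n = d2.get? n) :
    postB K T d1 = postB K T d2 := by
  unfold postB rawBodyB
  simp only [h]
-- ===== VERDICT (by name: the statement is the Claim_ definition above) =====
theorem assign_layers_spec : Claim_equal_assign_layers := by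
  intro nodes edges _ hPre
  unfold Spec_assign_layers
  by_cases hnil : nodes = []
  · subst hnil
    have hedges : edges = [] := by
      cases hedg : edges with
      | nil => rfl
      | cons e es =>
        exfalso
        have h1 := (hPre e (by rw [hedg]; simp)).1
        cases hg : (PySem.Dict.ofList e).get? "a" with
        | none => rw [hg] at h1; simp [Option.any] at h1
        | some a => rw [hg] at h1; simp [Option.any] at h1
    subst hedges
    rfl
  · have hPreE : ∀ e ∈ edges, ∃ a b, (PySem.Dict.ofList e).get? "a" = some a ∧
        (PySem.Dict.ofList e).get? "b" = some b ∧ a ∈ nodes ∧ b ∈ nodes := by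
      intro e he
      obtain ⟨h1, h2⟩ := hPre e he
      cases hga : (PySem.Dict.ofList e).get? "a" with
      | none => rw [hga] at h1; simp [Option.any] at h1
      | some a =>
        cases hgb : (PySem.Dict.ofList e).get? "b" with
        | none => rw [hgb] at h2; simp [Option.any] at h2
        | some b =>
          rw [hga] at h1
          rw [hgb] at h2
          simp [Option.any] at h1 h2
          exact ⟨a, b, rfl, rfl, h1, h2⟩
    show assign_layers nodes edges = assign_layers_alt nodes edges
    simp only [assign_layers, assign_layers_alt]
    have hKof : PySem.Set.ofList nodes = PySem.List.dedup nodes := rfl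
    set K := PySem.List.dedup nodes with hKdef
    have hKnodup : K.Nodup := by rw [← hKof]; exact PySem.Set.nodup_ofList nodes
    have hKmem : ∀ x, x ∈ K ↔ x ∈ nodes := by
      intro x
      rw [← hKof]
      exact PySem.Set.mem_ofList nodes x
    have hKne : K ≠ [] := by
      obtain ⟨n0, hn0⟩ := List.exists_mem_of_ne_nil nodes hnil
      intro h
      have h2 := (hKmem n0).mpr hn0
      rw [h] at h2
      cases h2
    have htypesItems : (buildTypes K).items = K.map (fun n => (n, classifyNode n)) := by
      unfold buildTypes
      rw [buildMap_items, ofList_self hKnodup]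
    have htypes : buildTypes nodes = buildTypes K := by
      apply PySem.Dict.ext
      unfold buildTypes
      rw [buildMap_items, buildMap_items, hKof, ofList_self hKnodup]
    have hTgetD : ∀ n ∈ K, (buildTypes K).getD n "" = classifyNode n := by
      intro n hn
      have hmem : (n, classifyNode n) ∈ (buildTypes K).items := by
        rw [htypesItems]; exact List.mem_map.mpr ⟨n, hn, rfl⟩
      have hnd : (buildTypes K).keys.Nodup := by
        show ((buildTypes K).items.map (fun p => p.1)).Nodup
        rw [htypesItems, List.map_map]
        simpa [Function.comp_def] using hKnodup
      exact PySem.Dict.getD_of_mem_items (buildTypes K) hmem hnd ""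
    have hadjeq : buildAdj nodes edges = buildAdj K edges := by
      unfold buildAdj
      have hbase : (nodes.foldl (fun (d : PySem.Dict String (PySem.Set String)) n =>
          d.insert n PySem.Set.empty) PySem.Dict.empty)
          = (K.foldl (fun (d : PySem.Dict String (PySem.Set String)) n =>
          d.insert n PySem.Set.empty) PySem.Dict.empty) := by
        apply PySem.Dict.ext
        rw [buildConst_items, buildConst_items, hKof, ofList_self hKnodup]
      rw [hbase]
    have hs1 : ((buildTypes nodes).items.filter (fun p => p.2 == "server")).map (fun p => p.1)
        = K.filter (fun n => classifyNode n == "server") := by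
      rw [htypes, htypesItems, List.filter_map, List.map_map]
      rw [show ((fun p : String × String => p.2 == "server") ∘ fun n => (n, classifyNode n))
          = fun n => classifyNode n == "server" from rfl]
      rw [show ((fun p : String × String => p.1) ∘ fun n => (n, classifyNode n))
          = fun n => n from rfl]
      simp
    have hs2 : ((buildTypes nodes).items.filter (fun p => p.2 == "switch")).map (fun p => p.1)
        = K.filter (fun n => classifyNode n == "switch") := by
      rw [htypes, htypesItems, List.filter_map, List.map_map]
      rw [show ((fun p : String × String => p.2 == "switch") ∘ fun n => (n, classifyNode n))
          = fun n => classifyNode n == "switch" from rfl]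
      rw [show ((fun p : String × String => p.1) ∘ fun n => (n, classifyNode n))
          = fun n => n from rfl]
      simp
    have hs1b : K.filter (fun n => (buildTypes K).getD n "" == "server")
        = K.filter (fun n => classifyNode n == "server") :=
      List.filter_congr (fun n hn => by rw [hTgetD n hn])
    have hs2b : K.filter (fun n => (buildTypes K).getD n "" == "switch")
        = K.filter (fun n => classifyNode n == "switch") :=
      List.filter_congr (fun n hn => by rw [hTgetD n hn])
    have hseeds : seedsOfA (buildTypes nodes) nodes = seedsOfB K (buildTypes K) := by
      unfold seedsOfA seedsOfB
      rw [hs1, hs2, hs1b, hs2b]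
      have hne : nodes.isEmpty = false := by
        cases nodes
        · exact absurd rfl hnil
        · rfl
      rw [hne]
      simp only [Bool.not_false, Bool.and_true]
      congr 1
      obtain ⟨a, l, hn⟩ : ∃ a l, nodes = a :: l := by
        cases nodes
        · exact absurd rfl hnil
        · exact ⟨_, _, rfl⟩
      obtain ⟨t, ht⟩ := ofList_cons a l
      have hK2 : K = a :: t := by rw [hKdef, hn]; exact ht
      rw [hn, hK2]
      simp
    rw [hseeds, hadjeq, htypes]
    set S := seedsOfB K (buildTypes K) with hSdef
    have hSsub : ∀ s ∈ S, s ∈ K := by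
      intro s hs
      rw [hSdef] at hs
      simp only [seedsOfB] at hs
      split_ifs at hs <;>
        first
          | exact List.mem_of_mem_take hs
          | exact List.mem_of_mem_filter hs
    have hSnodup : S.Nodup := by
      rw [hSdef]
      simp only [seedsOfB]
      split_ifs <;>
        first
          | exact (List.take_sublist _ _).nodup hKnodup
          | exact hKnodup.filter _
    have hSne : S ≠ [] := by
      rw [hSdef]
      simp only [seedsOfB]
      obtain ⟨k0, t, hk⟩ : ∃ k0 t, K = k0 :: t := by
        cases hKc : K
        · exact absurd hKc hKne
        · exact ⟨_, _, rfl⟩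
      split_ifs with h1 h2
      · rw [hk]; simp
      · intro e
        rw [e] at h2
        exact h2 rfl
      · intro e
        rw [e] at h1
        exact h1 rfl
    have hdist0 : nodes.foldl (fun (d : PySem.Dict String (Option Int)) n =>
        d.insert n (none : Option Int)) PySem.Dict.empty = AofB K PySem.Dict.empty := by
      apply PySem.Dict.ext
      rw [buildConst_items, hKof]
      show K.map (fun m => (m, (none : Option Int)))
        = K.map (fun n => (n, (PySem.Dict.empty : PySem.Dict String Int).get? n))
      apply List.map_congr_left
      intro n _
      rw [PySem.Dict.get?_empty]
    have hseedFold : ∀ (sl : List String) (dB : PySem.Dict String Int), (∀ s ∈ sl, s ∈ K) →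
        sl.foldl (fun d s => d.insert s (some (0 : Int))) (AofB K dB)
          = AofB K (sl.foldl (fun d s => d.insert s (0 : Int)) dB) := by
      intro sl
      induction sl with
      | nil => intro dB _; rfl
      | cons s sl ih =>
        intro dB hs
        rw [List.foldl_cons, List.foldl_cons, AofB_insert hKnodup dB (hs s (by simp)) 0]
        exact ih _ (fun x hx => hs x (by simp [hx]))
    have hinit : S.foldl (fun (p : PySem.Dict String (Option Int) × List String) s =>
        (p.1.insert s (some (0 : Int)), p.2 ++ [s]))
        (nodes.foldl (fun (d : PySem.Dict String (Option Int)) n =>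
          d.insert n (none : Option Int)) PySem.Dict.empty, ([] : List String))
        = (AofB K (S.foldl (fun (d : PySem.Dict String Int) s => d.insert s 0)
            PySem.Dict.empty), S) := by
      rw [PySem.List.foldl_prod_mk
        (f := fun (d : PySem.Dict String (Option Int)) s => d.insert s (some (0 : Int)))
        (g := fun (q : List String) s => q ++ [s])]
      rw [PySem.List.foldl_append_singleton_eq_self, List.nil_append]
      rw [hdist0, hseedFold S PySem.Dict.empty hSsub]
    have hinit1 : (S.foldl (fun (p : PySem.Dict String (Option Int) × List String) s =>
        (p.1.insert s (some (0 : Int)), p.2 ++ [s]))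
        (nodes.foldl (fun (d : PySem.Dict String (Option Int)) n =>
          d.insert n (none : Option Int)) PySem.Dict.empty, ([] : List String))).1
        = AofB K (S.foldl (fun (d : PySem.Dict String Int) s => d.insert s 0)
            PySem.Dict.empty) := by rw [hinit]
    have hinit2 : (S.foldl (fun (p : PySem.Dict String (Option Int) × List String) s =>
        (p.1.insert s (some (0 : Int)), p.2 ++ [s]))
        (nodes.foldl (fun (d : PySem.Dict String (Option Int)) n =>
          d.insert n (none : Option Int)) PySem.Dict.empty, ([] : List String))).2
        = S := by rw [hinit]
    rw [hinit1, hinit2]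
    set dB0 := S.foldl (fun (d : PySem.Dict String Int) s => d.insert s 0)
      PySem.Dict.empty with hdB0def
    have hdB0get := seedDict_get? hSnodup
    have hadjK : ∀ u v, v ∈ (buildAdj K edges).getD u PySem.Set.empty → v ∈ K := by
      apply adjVals
      intro e he
      obtain ⟨a, b, hga, hgb, ha, hb⟩ := hPreE e he
      exact ⟨a, b, hga, hgb, (hKmem a).mpr ha, (hKmem b).mpr hb⟩
    have hsym : AdjSym (buildAdj K edges) := buildAdj_sym K edges
    have hKlen : K.length ≤ nodes.length := by
      have h1 := ofList_length_le nodes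
      rw [hKof] at h1
      exact h1
    have hUle := Ucnt_le K dB0
    have hSlen : S.length ≤ K.length := by
      rw [hSdef]
      simp only [seedsOfB]
      split_ifs <;>
        first
          | exact (List.take_sublist _ _).length_le
          | exact List.length_filter_le _ _
    have hInv0 : LInv K (buildAdj K edges) 0 dB0 S := by
      refine ⟨le_refl 0, ?_, ?_, ?_, ?_⟩
      · intro n k h
        rw [hdB0get n] at h
        by_cases hn : n ∈ S
        · exact hSsub n hn
        · rw [if_neg hn] at h; cases h
      · intro n k h
        rw [hdB0get n] at h
        by_cases hn : n ∈ S
        · rw [if_pos hn] at h; injection h with h'; omega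
        · rw [if_neg hn] at h; cases h
      · intro n
        rw [hdB0get n]
        by_cases hn : n ∈ S
        · rw [if_pos hn]; simp [hn]
        · rw [if_neg hn]; simp [hn]
      · intro n v h hv
        rw [hdB0get n] at h
        by_cases hn : n ∈ S
        · rw [if_pos hn] at h; injection h with h'; omega
        · rw [if_neg hn] at h; cases h
    have hbfs : bfsA (buildAdj K edges) (3 * nodes.length + 1) (AofB K dB0) S
        = AofB K (bfsB (buildAdj K edges) (nodes.length + 2) dB0 S 0) := by
      apply simLevel hKnodup hadjK (nodes.length + 2) S 0 dB0 (3 * nodes.length + 1)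
      · intro u hu
        rw [hdB0get u, if_pos hu]
      · intro n k h
        rw [hdB0get n] at h
        by_cases hn : n ∈ S
        · rw [if_pos hn] at h
          injection h with h'
          omega
        · rw [if_neg hn] at h
          cases h
      · intro n k h
        rw [hdB0get n] at h
        by_cases hn : n ∈ S
        · exact hSsub n hn
        · rw [if_neg hn] at h
          cases h
      · omega
      · omega
    rw [hbfs]
    have hpost := post_eq hKnodup nodes hKof (buildTypes K) htypesItems
      (bfsB (buildAdj K edges) (nodes.length + 2) dB0 S 0)
      (by
        intro n k h
        refine bfsB_keys hadjK _ _ _ _ ?_ n k h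
        intro m j hm
        rw [hdB0get m] at hm
        by_cases hmS : m ∈ S
        · exact hSsub m hmS
        · rw [if_neg hmS] at hm
          cases hm)
      (by
        intro n k h
        refine bfsB_nonneg _ _ _ _ (by omega) ?_ n k h
        intro m j hm
        rw [hdB0get m] at hm
        by_cases hmS : m ∈ S
        · rw [if_pos hmS] at hm
          injection hm with hm'
          omega
        · rw [if_neg hmS] at hm
          cases hm)
      (by
        obtain ⟨s0, hs0⟩ := List.exists_mem_of_ne_nil S hSne
        exact ⟨s0, hSsub s0 hs0,
          bfsB_mono _ _ _ _ s0 0 (by rw [hdB0get s0, if_pos hs0])⟩)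
    rw [hpost]
    exact postB_congr K (buildTypes K)
      (fun n => (bfSim hKnodup hadjK hsym K.length 0 dB0 S (nodes.length + 2) dB0 hInv0
        hUle (by omega) (fun _ => rfl) n).symm)
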